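-- pv_equiv track=rewrite | github.com/amol-ship-it/agi-core | domains/arc/perception_primitives.py | smallest_object_color
-- ===== SOURCE A (Python) =====
-- from collections import Counter
--
-- Grid = list[list[int]]
--
-- def smallest_object_color(grid: Grid) -> int:
--     """Return the color of the smallest connected foreground component."""
--     if not grid or not grid[0]:
--         return 0
--     flat = [grid[r][c] for r in range(len(grid)) for c in range(len(grid[0]))]
--     bg = Counter(flat).most_common(1)[0][0]
--     h, w = len(grid), len(grid[0])
--     visited = set()
--     smallest_size = float('inf')
--     smallest_color = 0
--     for r in range(h):
--         for c in range(w):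
--             if grid[r][c] != bg and (r, c) not in visited:
--                 color = grid[r][c]
--                 size = 0
--                 queue = [(r, c)]
--                 visited.add((r, c))
--                 while queue:
--                     cr, cc = queue.pop()
--                     size += 1
--                     for dr, dc in [(-1, 0), (1, 0), (0, -1), (0, 1)]:
--                         nr, nc = cr + dr, cc + dc
--                         if (0 <= nr < h and 0 <= nc < w
--                                 and (nr, nc) not in visited
--                                 and grid[nr][nc] != bg):
--                             visited.add((nr, nc))
--                             queue.append((nr, nc))
--                 if size < smallest_size:
--                     smallest_size = size
--                     smallest_color = color
--     return smallest_color
-- ===== SOURCE B (Python) =====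
-- from collections import Counter
--
-- Grid = list[list[int]]
--
-- def smallest_object_color(grid: Grid) -> int:
--     """Return the color of the smallest connected foreground component."""
--     if not grid or not grid[0]:
--         return 0
--     h, w = len(grid), len(grid[0])
--     flat = [grid[r][c] for r in range(h) for c in range(w)]
--     bg = Counter(flat).most_common(1)[0][0]
--
--     # union-find over foreground cells; the root of every class is kept at the
--     # row-major smallest cell of the class (union by minimum)
--     parent = {}
--
--     def find(p):
--         while parent[p] != p:
--             p = parent[p]
--         return p
--
--     def union(p, q):
--         rp, rq = find(p), find(q)
--         if rp == rq:
--             return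
--         if rp > rq:
--             rp, rq = rq, rp
--         parent[rq] = rp
--
--     for r in range(h):
--         for c in range(w):
--             if grid[r][c] != bg:
--                 parent[(r, c)] = (r, c)
--                 if r > 0 and grid[r - 1][c] != bg:
--                     union((r - 1, c), (r, c))
--                 if c > 0 and grid[r][c - 1] != bg:
--                     union((r, c - 1), (r, c))
--
--     size = Counter(find(p) for p in parent)
--
--     best = None  # (component size, color of the component's first cell)
--     for r in range(h):
--         for c in range(w):
--             if grid[r][c] != bg and find((r, c)) == (r, c):
--                 sz = size[(r, c)]
--                 if best is None or sz < best[0]: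
--                     best = (sz, grid[r][c])
--     return best[1] if best is not None else 0
-- ===== Notes on version B (the rewrite author's own statement) =====
-- stated objective: alternative
-- what changed: A flood-fills each component with an explicit DFS stack and a visited set while scanning; B replaces the flood fill by a disjoint-set union (union-find keyed by cell, union-by-row-major-minimum with left/up neighbours only), then a Counter of sizes per root, then a final row-major scan that recognises a component's first cell as the cell that is its own root.
import Mathlib
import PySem

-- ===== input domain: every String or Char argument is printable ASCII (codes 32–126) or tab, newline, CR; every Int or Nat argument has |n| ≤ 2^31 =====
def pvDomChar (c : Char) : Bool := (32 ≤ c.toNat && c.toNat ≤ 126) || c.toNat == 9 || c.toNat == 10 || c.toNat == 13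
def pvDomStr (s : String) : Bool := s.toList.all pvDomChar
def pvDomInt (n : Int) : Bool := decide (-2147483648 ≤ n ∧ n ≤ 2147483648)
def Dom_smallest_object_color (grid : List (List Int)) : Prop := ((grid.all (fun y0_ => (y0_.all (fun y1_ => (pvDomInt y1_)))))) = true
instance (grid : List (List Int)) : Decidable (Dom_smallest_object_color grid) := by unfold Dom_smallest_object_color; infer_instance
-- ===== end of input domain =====

-- B replaces A's DFS flood fill (explicit stack + visited set, interleaved with the
-- scan) by a disjoint-set union: a union-find dict over foreground cells united with
-- their up/left neighbours, a Counter of class sizes per root, and a final scan that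
-- treats a cell that is its own root as its component's first cell; objective: alternative.

-- ===== PORT A =====
-- grid[r][c] (indices are nonnegative and in range wherever the ports evaluate this)
def pvCell (grid : List (List Int)) (r c : Int) : Int :=
  PySem.List.pyGetD (PySem.List.pyGetD grid r []) c 0

-- the literal list [(-1,0),(1,0),(0,-1),(0,1)] of A's neighbour deltas
def pvDeltas : List (Int × Int) := [(-1, 0), (1, 0), (0, -1), (0, 1)]

-- the four neighbour coordinates (cr+dr, cc+dc) produced by A's delta loop
def pvNbrsOf (p : Int × Int) : List (Int × Int) :=
  pvDeltas.map (fun d => (p.1 + d.1, p.2 + d.2))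

-- `size < smallest_size` where `none` renders the float('inf') sentinel
def pvLtInf (s : Int) (o : Option Int) : Bool :=
  match o with
  | none => true
  | some m => decide (s < m)

abbrev pvStateA := PySem.Set (Int × Int) × Option Int × Int

-- A's `while queue:` loop; fuel only guards totality (the callers pass enough for the
-- queue to empty first)
def pvFloodA (grid : List (List Int)) (bg h w : Int) :
    Nat → List (Int × Int) → PySem.Set (Int × Int) → Int → PySem.Set (Int × Int) × Int
  | 0, _, visited, size => (visited, size)
  | fuel + 1, queue, visited, size =>
    match queue.getLast? with
    | none => (visited, size)
    | some cur =>
      let st := (pvNbrsOf cur).foldl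
        (fun (st : List (Int × Int) × PySem.Set (Int × Int)) n =>
          if 0 ≤ n.1 ∧ n.1 < h ∧ 0 ≤ n.2 ∧ n.2 < w ∧ ¬ n ∈ st.2 ∧ pvCell grid n.1 n.2 ≠ bg
          then (st.1 ++ [n], PySem.Set.add st.2 n)
          else st)
        (queue.dropLast, visited)
      pvFloodA grid bg h w fuel st.1 st.2 (size + 1)

-- body of A's scan over one cell (r, c)
def pvCellStepA (grid : List (List Int)) (bg h w : Int) (fuel : Nat)
    (st : pvStateA) (r c : Int) : pvStateA :=
  if pvCell grid r c ≠ bg ∧ ¬ (r, c) ∈ st.1 then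
    let res := pvFloodA grid bg h w fuel [(r, c)] (PySem.Set.add st.1 (r, c)) 0
    if pvLtInf res.2 st.2.1 then (res.1, some res.2, pvCell grid r c)
    else (res.1, st.2.1, st.2.2)
  else st

def smallest_object_color (grid : List (List Int)) : Int :=
  if grid = [] ∨ grid.headD [] = [] then 0
  else
    let h : Int := grid.length
    let w : Int := (grid.headD []).length
    let flat := (PySem.List.pyRange 0 h 1).flatMap
      (fun r => (PySem.List.pyRange 0 w 1).map (fun c => pvCell grid r c))
    let bg := (PySem.List.max? (PySem.Dict.counter flat).items (fun kv => kv.2)).elim 0 (fun kv => kv.1)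
    let fuel := 2 * (grid.length * (grid.headD []).length) + 1
    let st := (PySem.List.pyRange 0 h 1).foldl
      (fun st r => (PySem.List.pyRange 0 w 1).foldl
        (fun st c => pvCellStepA grid bg h w fuel st r c) st)
      ([], none, 0)
    st.2.2

-- ===== PORT B =====
-- Python's tuple comparison rp > rq, i.e. rq lexicographically smaller
def pvLexLt (p q : Int × Int) : Bool :=
  decide (p.1 < q.1 ∨ (p.1 = q.1 ∧ p.2 < q.2))

-- Source B's `while parent[p] != p: p = parent[p]`; fuel only guards totality (parent
-- pointers strictly decrease in row-major order, so the callers' fuel suffices);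
-- getD p p treats a missing key as a root, which Source B never relies on (find is only
-- called on keys)
def pvUfFind (parent : PySem.Dict (Int × Int) (Int × Int)) :
    Nat → (Int × Int) → (Int × Int)
  | 0, p => p
  | fuel + 1, p =>
    let q := PySem.Dict.getD parent p p
    if q = p then p else pvUfFind parent fuel q

-- Source B's union: roots of p and q; keep the row-major smaller root
def pvUfUnion (parent : PySem.Dict (Int × Int) (Int × Int)) (fuel : Nat)
    (p q : Int × Int) : PySem.Dict (Int × Int) (Int × Int) :=
  let rp := pvUfFind parent fuel p
  let rq := pvUfFind parent fuel q
  if rp = rq then parent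
  else if pvLexLt rq rp then PySem.Dict.insert parent rp rq
  else PySem.Dict.insert parent rq rp

-- Source B's first pass over one cell: make (r,c) a singleton class, union with up/left
def pvBuildStep (grid : List (List Int)) (bg : Int) (fuel : Nat)
    (parent : PySem.Dict (Int × Int) (Int × Int)) (r c : Int) :
    PySem.Dict (Int × Int) (Int × Int) :=
  if pvCell grid r c ≠ bg then
    let p1 := PySem.Dict.insert parent (r, c) (r, c)
    let p2 := if 0 < r ∧ pvCell grid (r - 1) c ≠ bg
              then pvUfUnion p1 fuel (r - 1, c) (r, c) else p1
    if 0 < c ∧ pvCell grid r (c - 1) ≠ bg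
    then pvUfUnion p2 fuel (r, c - 1) (r, c) else p2
  else parent

-- Source B's final pass over one cell: a cell that is its own root starts a component
def pvScanStepB (grid : List (List Int)) (bg : Int) (fuel : Nat)
    (parent : PySem.Dict (Int × Int) (Int × Int))
    (sizes : PySem.Dict (Int × Int) Int)
    (st : Option (Int × Int)) (r c : Int) : Option (Int × Int) :=
  if pvCell grid r c ≠ bg ∧ pvUfFind parent fuel (r, c) = (r, c) then
    let sz := PySem.Dict.getD sizes (r, c) 0
    match st with
    | none => some (sz, pvCell grid r c)
    | some b => if sz < b.1 then some (sz, pvCell grid r c) else some b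
  else st

def smallest_object_color_alt (grid : List (List Int)) : Int :=
  if grid = [] ∨ grid.headD [] = [] then 0
  else
    let h : Int := grid.length
    let w : Int := (grid.headD []).length
    let flat := (PySem.List.pyRange 0 h 1).flatMap
      (fun r => (PySem.List.pyRange 0 w 1).map (fun c => pvCell grid r c))
    let bg := (PySem.List.max? (PySem.Dict.counter flat).items (fun kv => kv.2)).elim 0 (fun kv => kv.1)
    let fuel := grid.length * (grid.headD []).length + 1
    let parent := (PySem.List.pyRange 0 h 1).foldl
      (fun par r => (PySem.List.pyRange 0 w 1).foldl
        (fun par c => pvBuildStep grid bg fuel par r c) par)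
      PySem.Dict.empty
    let sizes := PySem.Dict.counter ((PySem.Dict.keys parent).map (pvUfFind parent fuel))
    let best := (PySem.List.pyRange 0 h 1).foldl
      (fun st r => (PySem.List.pyRange 0 w 1).foldl
        (fun st c => pvScanStepB grid bg fuel parent sizes st r c) st)
      none
    match best with
    | none => 0
    | some b => b.2

-- ===== PRECONDITION & SPEC =====
-- Pre_ excludes exactly the ragged grids on which Python A raises IndexError
-- (some row shorter than the first row while the first row is nonempty).
def Pre_smallest_object_color (grid : List (List Int)) : Prop :=
  ∀ row ∈ grid, (grid.headD []).length ≤ row.length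
instance (grid : List (List Int)) : Decidable (Pre_smallest_object_color grid) := by
  unfold Pre_smallest_object_color; infer_instance

def pvWitness_smallest_object_color : List (List Int) := [[1, 2], [1, 1]]

def Spec_smallest_object_color (grid : List (List Int)) (out : Int) : Prop :=
  out = smallest_object_color_alt grid
instance (grid : List (List Int)) (out : Int) : Decidable (Spec_smallest_object_color grid out) := by
  unfold Spec_smallest_object_color; infer_instance

-- ===== CLAIM (what is proved, stated in full; the proofs are below) =====
def Claim_equal_smallest_object_color : Prop :=
  ∀ (grid : List (List Int)), Dom_smallest_object_color grid →
    Pre_smallest_object_color grid →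
    Spec_smallest_object_color grid (smallest_object_color grid)

-- ===== LEMMAS AND PROOFS =====

-- foreground cell: in bounds and not the background colour
abbrev pvFg (grid : List (List Int)) (bg h w : Int) (p : Int × Int) : Prop :=
  0 ≤ p.1 ∧ p.1 < h ∧ 0 ≤ p.2 ∧ p.2 < w ∧ pvCell grid p.1 p.2 ≠ bg

-- one grid-adjacency step between foreground cells
abbrev pvE (grid : List (List Int)) (bg h w : Int) (p q : Int × Int) : Prop :=
  pvFg grid bg h w p ∧ pvFg grid bg h w q ∧ q ∈ pvNbrsOf p

def pvReach (grid : List (List Int)) (bg h w : Int) : Int × Int → Int × Int → Prop :=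
  Relation.ReflTransGen (pvE grid bg h w)

-- row-major (lexicographic) order on cells
abbrev pvLt (p q : Int × Int) : Prop := p.1 < q.1 ∨ (p.1 = q.1 ∧ p.2 < q.2)

-- all cells of the grid in row-major order
def pvCells (h w : Int) : List (Int × Int) :=
  (PySem.List.pyRange 0 h 1).flatMap
    (fun r => (PySem.List.pyRange 0 w 1).map (fun c => (r, c)))

-- A's flood fill started on x alone: the connected component of x
def pvComp (grid : List (List Int)) (bg h w : Int) (fuel : Nat) (x : Int × Int) :
    List (Int × Int) :=
  (pvFloodA grid bg h w fuel [x] [x] 0).1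

-- x has no row-major-smaller cell in its component
abbrev pvLeader (grid : List (List Int)) (bg h w : Int) (fuel : Nat) (x : Int × Int) : Prop :=
  ∀ q ∈ pvComp grid bg h w fuel x, ¬ pvLt q x

def pvUpd (st : Option (Int × Int)) (sz col : Int) : Option (Int × Int) :=
  match st with
  | none => some (sz, col)
  | some b => if sz < b.1 then some (sz, col) else some b

-- the canonical "best component" fold both programs compute
def pvCanonStep (grid : List (List Int)) (bg h w : Int) (fuel : Nat)
    (st : Option (Int × Int)) (x : Int × Int) : Option (Int × Int) :=
  if pvFg grid bg h w x ∧ pvLeader grid bg h w fuel x then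
    pvUpd st ((pvComp grid bg h w fuel x).length : Int) (pvCell grid x.1 x.2)
  else st

def pvCanon (grid : List (List Int)) (bg h w : Int) (fuel : Nat)
    (L : List (Int × Int)) : Option (Int × Int) :=
  L.foldl (pvCanonStep grid bg h w fuel) none

-- ---------- order facts ----------
lemma pvLt_irrefl (p : Int × Int) : ¬ pvLt p p := by simp [pvLt]

lemma pvLt_trans {p q r : Int × Int} (h1 : pvLt p q) (h2 : pvLt q r) : pvLt p r := by
  rcases h1 with h1 | ⟨h1, h1'⟩ <;> rcases h2 with h2 | ⟨h2, h2'⟩ <;>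
    simp_all [pvLt] <;> omega

lemma pvLt_asymm {p q : Int × Int} (h1 : pvLt p q) : ¬ pvLt q p := by
  intro h2; exact pvLt_irrefl p (pvLt_trans h1 h2)

lemma pvLt_trichotomy (p q : Int × Int) : pvLt p q ∨ p = q ∨ pvLt q p := by
  rcases p with ⟨a, b⟩; rcases q with ⟨c, d⟩
  simp only [pvLt, Prod.mk.injEq]
  omega

lemma pvLexLt_eq (p q : Int × Int) : pvLexLt p q = true ↔ pvLt p q := by
  simp [pvLexLt, pvLt]

-- both programs take the minimum root of two classes; the class minimum transfers
lemma pvLt_min_helper {q r mn : Int × Int} (hM : ¬ pvLt q r) (hr : mn = r ∨ pvLt mn r) :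
    ¬ pvLt q mn := by
  intro h
  rcases hr with rfl | hlt
  · exact hM h
  · exact hM (pvLt_trans h hlt)

-- ---------- graph facts ----------
lemma pvNbrs_ne_self {p q : Int × Int} (h : q ∈ pvNbrsOf p) : q ≠ p := by
  rcases p with ⟨a, b⟩
  simp only [pvNbrsOf, pvDeltas, List.map_cons, List.map_nil, List.mem_cons,
    List.not_mem_nil, or_false] at h
  rcases h with rfl | rfl | rfl | rfl <;> simp [Prod.ext_iff]

lemma pvMem_nbrs_symm {p q : Int × Int} (h : q ∈ pvNbrsOf p) : p ∈ pvNbrsOf q := by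
  rcases p with ⟨a, b⟩
  simp only [pvNbrsOf, pvDeltas, List.map_cons, List.map_nil, List.mem_cons,
    List.not_mem_nil, or_false] at h ⊢
  rcases h with rfl | rfl | rfl | rfl <;> simp [Prod.ext_iff]

lemma pvE_symm (grid : List (List Int)) (bg h w : Int) :
    Symmetric (pvE grid bg h w) := by
  intro p q ⟨hp, hq, hn⟩
  exact ⟨hq, hp, pvMem_nbrs_symm hn⟩

lemma pvReach_symm (grid : List (List Int)) (bg h w : Int) :
    Symmetric (pvReach grid bg h w) :=
  Relation.ReflTransGen.symmetric (pvE_symm grid bg h w)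

lemma pvReach_fg (grid : List (List Int)) (bg h w : Int) {x q : Int × Int}
    (hx : pvFg grid bg h w x) (hr : pvReach grid bg h w x q) : pvFg grid bg h w q := by
  induction hr with
  | refl => exact hx
  | tail _ e _ => exact e.2.1

-- ---------- A-side flood-fill lemmas ----------
lemma pvCard_le (grid : List (List Int)) (bg h w : Int) (V : List (Int × Int))
    (hnd : V.Nodup) (hfg : ∀ p ∈ V, pvFg grid bg h w p) :
    V.length ≤ h.toNat * w.toNat := by
  have hsub : V ⊆ (List.range h.toNat ×ˢ List.range w.toNat).map
      (fun rc => ((rc.1 : Int), (rc.2 : Int))) := by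
    intro p hp
    obtain ⟨h1, h2, h3, h4, -⟩ := hfg p hp
    refine List.mem_map.2 ⟨(p.1.toNat, p.2.toNat), ?_, ?_⟩
    · exact List.mem_product.2 ⟨List.mem_range.2 (by omega), List.mem_range.2 (by omega)⟩
    · simp [Int.toNat_of_nonneg h1, Int.toNat_of_nonneg h3]
  have hle := (List.subperm_of_subset hnd hsub).length_le
  simpa [List.length_product] using hle

lemma pvReach_mem_of_closed (grid : List (List Int)) (bg h w : Int)
    (S : List (Int × Int)) (hS : ∀ p ∈ S, ∀ q, pvE grid bg h w p q → q ∈ S)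
    {p q : Int × Int} (h : pvReach grid bg h w p q) (hp : p ∈ S) : q ∈ S := by
  induction h with
  | refl => exact hp
  | tail _ e ih => exact hS _ ih _ e

lemma pvInnerA_spec (grid : List (List Int)) (bg h w : Int) (cs : List (Int × Int)) :
    ∀ (Q V : List (Int × Int)),
    ∃ N : List (Int × Int),
      cs.foldl
        (fun (st : List (Int × Int) × PySem.Set (Int × Int)) n =>
          if 0 ≤ n.1 ∧ n.1 < h ∧ 0 ≤ n.2 ∧ n.2 < w ∧ ¬ n ∈ st.2 ∧ pvCell grid n.1 n.2 ≠ bg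
          then (st.1 ++ [n], PySem.Set.add st.2 n)
          else st) (Q, V) = (Q ++ N, V ++ N)
      ∧ N.Nodup
      ∧ (∀ n ∈ N, n ∉ V ∧ n ∈ cs ∧ pvFg grid bg h w n)
      ∧ (∀ n ∈ cs, pvFg grid bg h w n → n ∈ V ++ N) := by
  induction cs with
  | nil => exact fun Q V => ⟨[], by simp, List.nodup_nil, by simp, by simp⟩
  | cons c cs ih =>
    intro Q V
    simp only [List.foldl_cons]
    by_cases hc : 0 ≤ c.1 ∧ c.1 < h ∧ 0 ≤ c.2 ∧ c.2 < w ∧ ¬ c ∈ V ∧ pvCell grid c.1 c.2 ≠ bg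
    · rw [if_pos hc, PySem.Set.add_of_not_mem hc.2.2.2.2.1]
      obtain ⟨N, hst, hnd, hprop, hcov⟩ := ih (Q ++ [c]) (V ++ [c])
      refine ⟨c :: N, ?_, ?_, ?_, ?_⟩
      · rw [hst]; simp
      · refine List.nodup_cons.2 ⟨fun hcN => ?_, hnd⟩
        exact (hprop c hcN).1 (by simp)
      · intro n hn
        rcases List.mem_cons.1 hn with rfl | hn
        · exact ⟨hc.2.2.2.2.1, List.mem_cons_self,
            ⟨hc.1, hc.2.1, hc.2.2.1, hc.2.2.2.1, hc.2.2.2.2.2⟩⟩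
        · obtain ⟨h1, h2, h3⟩ := hprop n hn
          exact ⟨fun hv => h1 (by simp [hv]), List.mem_cons_of_mem _ h2, h3⟩
      · intro n hn hfgn
        rcases List.mem_cons.1 hn with rfl | hn
        · simp
        · have := hcov n hn hfgn; simpa using this
    · rw [if_neg hc]
      obtain ⟨N, hst, hnd, hprop, hcov⟩ := ih Q V
      refine ⟨N, hst, hnd, fun n hn => ?_, fun n hn hfgn => ?_⟩
      · obtain ⟨h1, h2, h3⟩ := hprop n hn
        exact ⟨h1, List.mem_cons_of_mem _ h2, h3⟩
      · rcases List.mem_cons.1 hn with rfl | hn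
        · have hcV : n ∈ V := by
            by_contra hnv
            exact hc ⟨hfgn.1, hfgn.2.1, hfgn.2.2.1, hfgn.2.2.2.1, hnv, hfgn.2.2.2.2⟩
          exact List.mem_append_left _ hcV
        · exact hcov n hn hfgn

lemma pvFloodA_spec (grid : List (List Int)) (bg h w : Int) :
    ∀ (fuel : Nat) (L V : List (Int × Int)) (s : Int),
    L.length + 2 * (h.toNat * w.toNat) ≤ fuel + 2 * V.length →
    V.Nodup → (∀ p ∈ V, pvFg grid bg h w p) →
    (∀ p ∈ L, p ∈ V) → L.Nodup →
    (∀ p ∈ V, p ∉ L → ∀ q, pvE grid bg h w p q → q ∈ V) →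
    (pvFloodA grid bg h w fuel L V s).1.Nodup
    ∧ (∀ p ∈ (pvFloodA grid bg h w fuel L V s).1, pvFg grid bg h w p)
    ∧ (∀ p ∈ V, p ∈ (pvFloodA grid bg h w fuel L V s).1)
    ∧ (∀ p ∈ (pvFloodA grid bg h w fuel L V s).1, ∀ q, pvE grid bg h w p q →
        q ∈ (pvFloodA grid bg h w fuel L V s).1)
    ∧ (pvFloodA grid bg h w fuel L V s).2
        = s + (L.length : Int) + ((pvFloodA grid bg h w fuel L V s).1.length : Int) - (V.length : Int) := by
  intro fuel
  induction fuel with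
  | zero =>
    intro L V s hfuel hVnd hVfg hLV hLnd hcl
    have hcard := pvCard_le grid bg h w V hVnd hVfg
    have hL : L = [] := List.length_eq_zero_iff.1 (by omega)
    subst hL
    simp only [pvFloodA]
    exact ⟨hVnd, hVfg, fun p hp => hp,
      fun p hp q he => hcl p hp (by simp) q he, by simp⟩
  | succ fuel ih =>
    intro L V s hfuel hVnd hVfg hLV hLnd hcl
    cases hq : L.getLast? with
    | none =>
      have hL : L = [] := List.getLast?_eq_none_iff.1 hq
      subst hL
      simp only [pvFloodA, List.getLast?_nil]
      exact ⟨hVnd, hVfg, fun p hp => hp,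
        fun p hp q he => hcl p hp (by simp) q he, by simp⟩
    | some cur =>
      obtain ⟨Q, rfl⟩ := List.getLast?_eq_some_iff.1 hq
      obtain ⟨N, hst, hNnd, hNprop, hNcov⟩ := pvInnerA_spec grid bg h w (pvNbrsOf cur) Q V
      have hred : pvFloodA grid bg h w (fuel + 1) (Q ++ [cur]) V s
          = pvFloodA grid bg h w fuel (Q ++ N) (V ++ N) (s + 1) := by
        simp only [pvFloodA, List.getLast?_concat, List.dropLast_concat, hst]
      rw [hred]
      have hVnd1 : (V ++ N).Nodup := by
        refine List.nodup_append.2 ⟨hVnd, hNnd, ?_⟩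
        intro a ha b hb hne
        exact (hNprop b hb).1 (hne ▸ ha)
      have hVfg1 : ∀ p ∈ V ++ N, pvFg grid bg h w p := by
        intro p hp
        rcases List.mem_append.1 hp with hp | hp
        · exact hVfg p hp
        · exact (hNprop p hp).2.2
      have hLV1 : ∀ p ∈ Q ++ N, p ∈ V ++ N := by
        intro p hp
        rcases List.mem_append.1 hp with hp | hp
        · exact List.mem_append_left _ (hLV p (List.mem_append_left _ hp))
        · exact List.mem_append_right _ hp
      have hLnd1 : (Q ++ N).Nodup := by
        refine List.nodup_append.2 ⟨(List.nodup_append.1 hLnd).1, hNnd, ?_⟩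
        intro a ha b hb hne
        exact (hNprop b hb).1 (hne ▸ hLV a (List.mem_append_left _ ha))
      have hcl1 : ∀ p ∈ V ++ N, p ∉ Q ++ N → ∀ q, pvE grid bg h w p q → q ∈ V ++ N := by
        intro p hp hnp q he
        rcases List.mem_append.1 hp with hp | hp
        · by_cases hpc : p = cur
          · subst hpc
            exact hNcov q he.2.2 he.2.1
          · have hpL : p ∉ Q ++ [cur] := by
              intro hmem
              rcases List.mem_append.1 hmem with hm | hm
              · exact hnp (List.mem_append_left _ hm)
              · exact hpc (List.mem_singleton.1 hm)
            exact List.mem_append_left _ (hcl p hp hpL q he)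
        · exact absurd (List.mem_append_right _ hp) hnp
      have hfuel1 : (Q ++ N).length + 2 * (h.toNat * w.toNat) ≤ fuel + 2 * (V ++ N).length := by
        simp only [List.length_append] at hfuel ⊢
        simp at hfuel
        omega
      obtain ⟨ih1, ih2, ih3, ih4, ih5⟩ :=
        ih (Q ++ N) (V ++ N) (s + 1) hfuel1 hVnd1 hVfg1 hLV1 hLnd1 hcl1
      refine ⟨ih1, ih2, fun p hp => ih3 p (List.mem_append_left _ hp), ih4, ?_⟩
      rw [ih5]
      simp only [List.length_append, List.length_singleton]
      push_cast
      ring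

lemma pvFloodA_subset (grid : List (List Int)) (bg h w : Int) (U : Int × Int → Prop) :
    ∀ (fuel : Nat) (L V : List (Int × Int)) (s : Int),
    (∀ p ∈ L, pvFg grid bg h w p) →
    (∀ p ∈ V, U p) → (∀ p ∈ L, ∀ q, pvReach grid bg h w p q → U q) →
    ∀ p ∈ (pvFloodA grid bg h w fuel L V s).1, U p := by
  intro fuel
  induction fuel with
  | zero =>
    intro L V s _ hVU _ p hp
    simp only [pvFloodA] at hp
    exact hVU p hp
  | succ fuel ih =>
    intro L V s hLfg hVU hLU
    cases hq : L.getLast? with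
    | none =>
      have hL : L = [] := List.getLast?_eq_none_iff.1 hq
      subst hL
      simp only [pvFloodA, List.getLast?_nil]
      exact hVU
    | some cur =>
      obtain ⟨Q, rfl⟩ := List.getLast?_eq_some_iff.1 hq
      obtain ⟨N, hst, hNnd, hNprop, hNcov⟩ := pvInnerA_spec grid bg h w (pvNbrsOf cur) Q V
      have hred : pvFloodA grid bg h w (fuel + 1) (Q ++ [cur]) V s
          = pvFloodA grid bg h w fuel (Q ++ N) (V ++ N) (s + 1) := by
        simp only [pvFloodA, List.getLast?_concat, List.dropLast_concat, hst]
      rw [hred]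
      have hcurfg : pvFg grid bg h w cur := hLfg cur (by simp)
      have hEcur : ∀ n ∈ N, pvE grid bg h w cur n := by
        intro n hn
        exact ⟨hcurfg, (hNprop n hn).2.2, (hNprop n hn).2.1⟩
      apply ih
      · intro p hp
        rcases List.mem_append.1 hp with hp | hp
        · exact hLfg p (List.mem_append_left _ hp)
        · exact (hNprop p hp).2.2
      · intro p hp
        rcases List.mem_append.1 hp with hp | hp
        · exact hVU p hp
        · exact hLU cur (by simp) p (Relation.ReflTransGen.single (hEcur p hp))
      · intro p hp q hq
        rcases List.mem_append.1 hp with hp | hp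
        · exact hLU p (List.mem_append_left _ hp) q hq
        · exact hLU cur (by simp) q (Relation.ReflTransGen.head (hEcur p hp) hq)

lemma pvComp_spec (grid : List (List Int)) (bg h w : Int) (fuel : Nat)
    (hfuel : 2 * (h.toNat * w.toNat) + 1 ≤ fuel) {x : Int × Int}
    (hx : pvFg grid bg h w x) :
    (∀ q, q ∈ pvComp grid bg h w fuel x ↔ pvReach grid bg h w x q)
    ∧ (pvComp grid bg h w fuel x).Nodup := by
  simp only [pvComp]
  obtain ⟨a1, a2, a3, a4, -⟩ := pvFloodA_spec grid bg h w fuel [x] [x] 0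
    (by simp; omega) (List.nodup_singleton x)
    (by intro p hp; rw [List.mem_singleton.1 hp]; exact hx)
    (fun p hp => hp) (List.nodup_singleton x)
    (by intro p hp hnp; exact absurd hp hnp)
  refine ⟨fun q => ⟨?_, ?_⟩, a1⟩
  · intro hq
    refine pvFloodA_subset grid bg h w (pvReach grid bg h w x) fuel [x] [x] 0 ?_ ?_ ?_ q hq
    · intro p hp; rw [List.mem_singleton.1 hp]; exact hx
    · intro p hp; rw [List.mem_singleton.1 hp]; exact Relation.ReflTransGen.refl
    · intro p hp r hr; rw [List.mem_singleton.1 hp] at hr; exact hr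
  · intro hq
    exact pvReach_mem_of_closed grid bg h w _ a4 hq (a3 x (by simp))

lemma pvFloodA_run (grid : List (List Int)) (bg h w : Int) (fuel : Nat)
    (hfuel : 2 * (h.toNat * w.toNat) + 1 ≤ fuel)
    (V : List (Int × Int)) (x : Int × Int)
    (hVnd : V.Nodup) (hVfg : ∀ p ∈ V, pvFg grid bg h w p)
    (hVcl : ∀ p ∈ V, ∀ q, pvE grid bg h w p q → q ∈ V)
    (hx : pvFg grid bg h w x) (hxV : x ∉ V) :
    (∀ q, q ∈ (pvFloodA grid bg h w fuel [x] (PySem.Set.add V x) 0).1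
        ↔ q ∈ V ∨ pvReach grid bg h w x q)
    ∧ (pvFloodA grid bg h w fuel [x] (PySem.Set.add V x) 0).1.Nodup
    ∧ (∀ p ∈ (pvFloodA grid bg h w fuel [x] (PySem.Set.add V x) 0).1, pvFg grid bg h w p)
    ∧ (∀ p ∈ (pvFloodA grid bg h w fuel [x] (PySem.Set.add V x) 0).1, ∀ q,
        pvE grid bg h w p q → q ∈ (pvFloodA grid bg h w fuel [x] (PySem.Set.add V x) 0).1)
    ∧ (pvFloodA grid bg h w fuel [x] (PySem.Set.add V x) 0).2
        = ((pvComp grid bg h w fuel x).length : Int) := by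
  have hxadd : PySem.Set.add V x = V ++ [x] := PySem.Set.add_of_not_mem hxV
  rw [hxadd]
  have hndV1 : (V ++ [x]).Nodup := by
    refine List.nodup_append.2 ⟨hVnd, List.nodup_singleton x, ?_⟩
    intro a ha b hb hne; rw [List.mem_singleton.1 hb] at hne; exact hxV (hne ▸ ha)
  have hfg1 : ∀ p ∈ V ++ [x], pvFg grid bg h w p := by
    intro p hp; rcases List.mem_append.1 hp with hp | hp
    · exact hVfg p hp
    · rw [List.mem_singleton.1 hp]; exact hx
  have hcl1 : ∀ p ∈ V ++ [x], p ∉ [x] → ∀ q, pvE grid bg h w p q → q ∈ V ++ [x] := by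
    intro p hp hnp q he
    rcases List.mem_append.1 hp with hp | hp
    · exact List.mem_append_left _ (hVcl p hp q he)
    · exact absurd hp hnp
  obtain ⟨a1, a2, a3, a4, a5⟩ := pvFloodA_spec grid bg h w fuel [x] (V ++ [x]) 0
    (by simp; omega) hndV1 hfg1 (fun p hp => List.mem_append_right _ hp)
    (List.nodup_singleton x) hcl1
  have hmem : ∀ q, q ∈ (pvFloodA grid bg h w fuel [x] (V ++ [x]) 0).1
      ↔ q ∈ V ∨ pvReach grid bg h w x q := by
    intro q
    constructor
    · intro hq
      refine pvFloodA_subset grid bg h w (fun z => z ∈ V ∨ pvReach grid bg h w x z)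
        fuel [x] (V ++ [x]) 0 ?_ ?_ ?_ q hq
      · intro p hp; rw [List.mem_singleton.1 hp]; exact hx
      · intro p hp
        rcases List.mem_append.1 hp with hp | hp
        · exact Or.inl hp
        · rw [List.mem_singleton.1 hp]; exact Or.inr Relation.ReflTransGen.refl
      · intro p hp r hr; rw [List.mem_singleton.1 hp] at hr; exact Or.inr hr
    · intro hq
      rcases hq with hq | hq
      · exact a3 q (List.mem_append_left _ hq)
      · exact pvReach_mem_of_closed grid bg h w _ a4 hq (a3 x (by simp))
  obtain ⟨hcm, hcn⟩ := pvComp_spec grid bg h w fuel hfuel hx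
  have hdisj : ∀ q ∈ pvComp grid bg h w fuel x, q ∉ V := by
    intro q hq hqV
    have hr := (hcm q).1 hq
    exact hxV (pvReach_mem_of_closed grid bg h w V hVcl (pvReach_symm grid bg h w hr) hqV)
  have hnd2 : (V ++ pvComp grid bg h w fuel x).Nodup := by
    refine List.nodup_append.2 ⟨hVnd, hcn, ?_⟩
    intro a ha b hb hne
    exact (hdisj b hb) (hne ▸ ha)
  have hperm : (pvFloodA grid bg h w fuel [x] (V ++ [x]) 0).1.Perm
      (V ++ pvComp grid bg h w fuel x) := by
    refine (List.perm_ext_iff_of_nodup a1 hnd2).2 ?_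
    intro q
    rw [hmem q, List.mem_append, hcm q]
  have hlen := hperm.length_eq
  refine ⟨hmem, a1, a2, a4, ?_⟩
  rw [a5]
  rw [List.length_append] at hlen
  simp only [List.length_append, List.length_singleton, hlen]
  push_cast
  ring

-- ---------- the row-major cell list ----------
lemma pvCells_mem (h w : Int) (p : Int × Int) :
    p ∈ pvCells h w ↔ 0 ≤ p.1 ∧ p.1 < h ∧ 0 ≤ p.2 ∧ p.2 < w := by
  rcases p with ⟨a, b⟩
  simp only [pvCells, List.mem_flatMap, List.mem_map, PySem.List.mem_pyRange_one,
    Prod.mk.injEq]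
  constructor
  · rintro ⟨r, hr, c, hc, rfl, rfl⟩
    exact ⟨hr.1, hr.2, hc.1, hc.2⟩
  · rintro ⟨h1, h2, h3, h4⟩
    exact ⟨a, ⟨h1, h2⟩, b, ⟨h3, h4⟩, rfl, rfl⟩

lemma pvPyRange_nil {a b : Int} (hab : b ≤ a) : PySem.List.pyRange a b 1 = [] := by
  simp [PySem.List.pyRange]; omega

lemma pvPyRange_pairwise (a b : Int) : (PySem.List.pyRange a b 1).Pairwise (· < ·) := by
  have key : ∀ (n : Nat) (a : Int), (b - a).toNat ≤ n →
      (PySem.List.pyRange a b 1).Pairwise (· < ·) := by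
    intro n
    induction n with
    | zero =>
      intro a ha
      rw [pvPyRange_nil (by omega)]
      exact List.Pairwise.nil
    | succ n ih =>
      intro a ha
      by_cases hab : a < b
      · rw [PySem.List.pyRange_one_cons hab]
        refine List.Pairwise.cons ?_ (ih (a + 1) (by omega))
        intro x hx
        have := (PySem.List.mem_pyRange_one).1 hx
        omega
      · rw [pvPyRange_nil (by omega)]
        exact List.Pairwise.nil
  exact key (b - a).toNat a le_rfl

lemma pvCells_pairwise (h w : Int) : (pvCells h w).Pairwise pvLt := by
  rw [pvCells, List.pairwise_flatMap]
  constructor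
  · intro r hr
    rw [List.pairwise_map]
    exact (pvPyRange_pairwise 0 w).imp (fun hc => Or.inr ⟨rfl, hc⟩)
  · refine (pvPyRange_pairwise 0 h).imp ?_
    intro r1 r2 hlt x hx y hy
    obtain ⟨c1, -, rfl⟩ := List.mem_map.1 hx
    obtain ⟨c2, -, rfl⟩ := List.mem_map.1 hy
    exact Or.inl hlt

lemma pvNestedFold {β : Type} (f : β → Int → Int → β) (init : β) (h w : Int) :
    (PySem.List.pyRange 0 h 1).foldl
      (fun st r => (PySem.List.pyRange 0 w 1).foldl (fun st c => f st r c) st) init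
    = (pvCells h w).foldl (fun st p => f st p.1 p.2) init := by
  rw [pvCells, List.foldl_flatMap]
  congr 1
  funext st r
  rw [List.foldl_map]

-- facts about the split of the row-major list at a processed prefix
lemma pvSplit_facts (h w : Int) (L : List (Int × Int)) (x : Int × Int)
    (cs : List (Int × Int)) (hsplit : pvCells h w = L ++ x :: cs) :
    (0 ≤ x.1 ∧ x.1 < h ∧ 0 ≤ x.2 ∧ x.2 < w) ∧ x ∉ L
    ∧ (∀ p ∈ L, pvLt p x)
    ∧ (∀ q : Int × Int, (0 ≤ q.1 ∧ q.1 < h ∧ 0 ≤ q.2 ∧ q.2 < w) → pvLt q x → q ∈ L) := by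
  have hpw := pvCells_pairwise h w
  rw [hsplit] at hpw
  have hxmem : x ∈ pvCells h w := by rw [hsplit]; simp
  have hxb := (pvCells_mem h w x).1 hxmem
  obtain ⟨hpwL, hpwR, hcross⟩ := List.pairwise_append.1 hpw
  refine ⟨hxb, ?_, ?_, ?_⟩
  · intro hxL
    exact pvLt_irrefl x (hcross x hxL x (by simp))
  · intro p hp
    exact hcross p hp x (by simp)
  · intro q hqb hql
    have hq : q ∈ pvCells h w := (pvCells_mem h w q).2 hqb
    rw [hsplit] at hq
    rcases List.mem_append.1 hq with hq | hq
    · exact hq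
    · rcases List.mem_cons.1 hq with rfl | hq
      · exact absurd hql (pvLt_irrefl q)
      · exact absurd hql (pvLt_asymm ((List.pairwise_cons.1 hpwR).1 q hq))

-- ---------- A: the scan equals the canonical fold ----------
def pvInvA (grid : List (List Int)) (bg h w : Int) (fuel : Nat)
    (L : List (Int × Int)) (st : pvStateA) : Prop :=
  st.1.Nodup
  ∧ (∀ p ∈ st.1, pvFg grid bg h w p)
  ∧ (∀ p ∈ st.1, ∀ q, pvE grid bg h w p q → q ∈ st.1)
  ∧ (∀ q, q ∈ st.1 ↔ ∃ p ∈ L, pvFg grid bg h w p ∧ pvReach grid bg h w p q)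
  ∧ st.2.1 = Option.map Prod.fst (pvCanon grid bg h w fuel L)
  ∧ st.2.2 = (Option.map Prod.snd (pvCanon grid bg h w fuel L)).getD 0

lemma pvScanA_go (grid : List (List Int)) (bg h w : Int) (fuel : Nat)
    (hfuel : 2 * (h.toNat * w.toNat) + 1 ≤ fuel) :
    ∀ (cs L : List (Int × Int)), pvCells h w = L ++ cs →
    ∀ st : pvStateA, pvInvA grid bg h w fuel L st →
    pvInvA grid bg h w fuel (L ++ cs)
      (cs.foldl (fun st p => pvCellStepA grid bg h w fuel st p.1 p.2) st) := by
  intro cs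
  induction cs with
  | nil => intro L hsplit st hinv; simpa using hinv
  | cons x cs ih =>
    intro L hsplit st hinv
    obtain ⟨hxb, hxL, hLlt, hcomp⟩ := pvSplit_facts h w L x cs hsplit
    obtain ⟨hnd, hfg, hcl, hmem, hb1, hb2⟩ := hinv
    have hcanon : pvCanon grid bg h w fuel (L ++ [x])
        = pvCanonStep grid bg h w fuel (pvCanon grid bg h w fuel L) x := by
      simp [pvCanon]
    have hstep : pvInvA grid bg h w fuel (L ++ [x])
        (pvCellStepA grid bg h w fuel st x.1 x.2) := by
      by_cases hcell : pvCell grid x.1 x.2 ≠ bg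
      · have hfgx : pvFg grid bg h w x :=
          ⟨hxb.1, hxb.2.1, hxb.2.2.1, hxb.2.2.2, hcell⟩
        by_cases hxin : x ∈ st.1
        · -- already visited: both sides skip
          obtain ⟨p0, hp0L, hp0fg, hp0r⟩ := (hmem x).1 hxin
          have hskipA : pvCellStepA grid bg h w fuel st x.1 x.2 = st := by
            simp only [pvCellStepA]
            rw [if_neg]
            rintro ⟨-, hni⟩
            exact hni hxin
          have hskipC : pvCanon grid bg h w fuel (L ++ [x]) = pvCanon grid bg h w fuel L := by
            rw [hcanon]
            simp only [pvCanonStep]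
            rw [if_neg]
            rintro ⟨-, hlead⟩
            refine hlead p0 ?_ (hLlt p0 hp0L)
            exact ((pvComp_spec grid bg h w fuel hfuel hfgx).1 p0).2
              (pvReach_symm grid bg h w hp0r)
          rw [hskipA]
          refine ⟨hnd, hfg, hcl, ?_, by rw [hskipC]; exact hb1, by rw [hskipC]; exact hb2⟩
          intro q
          rw [hmem q]
          constructor
          · rintro ⟨p, hp, hfp, hr⟩
            exact ⟨p, List.mem_append_left _ hp, hfp, hr⟩
          · rintro ⟨p, hp, hfp, hr⟩
            rcases List.mem_append.1 hp with hp | hp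
            · exact ⟨p, hp, hfp, hr⟩
            · have : p = x := List.mem_singleton.1 hp
              exact ⟨p0, hp0L, hp0fg, hp0r.trans (this ▸ hr)⟩
        · -- a new component: A floods it, the canonical fold records it
          have hlead : pvLeader grid bg h w fuel x := by
            intro q hq hlt
            have hr := ((pvComp_spec grid bg h w fuel hfuel hfgx).1 q).1 hq
            have hfq : pvFg grid bg h w q := pvReach_fg grid bg h w hfgx hr
            have hqL : q ∈ L := hcomp q ⟨hfq.1, hfq.2.1, hfq.2.2.1, hfq.2.2.2.1⟩ hlt
            exact hxin ((hmem x).2 ⟨q, hqL, hfq, pvReach_symm grid bg h w hr⟩)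
          obtain ⟨m1, m2, m3, m4, m5⟩ := pvFloodA_run grid bg h w fuel hfuel st.1 x
            hnd hfg hcl hfgx hxin
          have hfire : pvCellStepA grid bg h w fuel st x.1 x.2
              = (let res := pvFloodA grid bg h w fuel [(x.1, x.2)]
                    (PySem.Set.add st.1 (x.1, x.2)) 0;
                 if pvLtInf res.2 st.2.1 then (res.1, some res.2, pvCell grid x.1 x.2)
                 else (res.1, st.2.1, st.2.2)) := by
            simp only [pvCellStepA]
            rw [if_pos ⟨hcell, hxin⟩]
          have hcanon' : pvCanon grid bg h w fuel (L ++ [x])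
              = pvUpd (pvCanon grid bg h w fuel L)
                  ((pvComp grid bg h w fuel x).length : Int) (pvCell grid x.1 x.2) := by
            rw [hcanon]
            simp only [pvCanonStep]
            rw [if_pos ⟨hfgx, hlead⟩]
          have hmem' : ∀ q, q ∈ (pvFloodA grid bg h w fuel [x]
              (PySem.Set.add st.1 x) 0).1
              ↔ ∃ p ∈ L ++ [x], pvFg grid bg h w p ∧ pvReach grid bg h w p q := by
            intro q
            rw [m1 q]
            constructor
            · rintro (hq | hq)
              · obtain ⟨p, hp, hfp, hr⟩ := (hmem q).1 hq
                exact ⟨p, List.mem_append_left _ hp, hfp, hr⟩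
              · exact ⟨x, List.mem_append_right _ (by simp), hfgx, hq⟩
            · rintro ⟨p, hp, hfp, hr⟩
              rcases List.mem_append.1 hp with hp | hp
              · exact Or.inl ((hmem q).2 ⟨p, hp, hfp, hr⟩)
              · have : p = x := List.mem_singleton.1 hp
                exact Or.inr (this ▸ hr)
          rw [hfire]
          cases hcan : pvCanon grid bg h w fuel L with
          | none =>
            have hst21 : st.2.1 = none := by rw [hb1, hcan]; rfl
            simp only [hst21, pvLtInf, if_pos]
            refine ⟨m2, m3, m4, hmem', ?_, ?_⟩
            · rw [hcanon', hcan, m5]; rfl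
            · rw [hcanon', hcan]; rfl
          | some b =>
            have hst21 : st.2.1 = some b.1 := by rw [hb1, hcan]; rfl
            rw [hst21]
            simp only [pvLtInf]
            by_cases hlt : (pvFloodA grid bg h w fuel [x] (PySem.Set.add st.1 x) 0).2 < b.1
            · rw [if_pos (by simpa using hlt)]
              refine ⟨m2, m3, m4, hmem', ?_, ?_⟩
              · rw [hcanon', hcan, m5]
                simp only [pvUpd]
                rw [if_pos (by rw [← m5]; exact hlt)]
                rfl
              · rw [hcanon', hcan]
                simp only [pvUpd]
                rw [if_pos (by rw [← m5]; exact hlt)]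
                rfl
            · rw [if_neg (by simpa using hlt)]
              refine ⟨m2, m3, m4, hmem', ?_, ?_⟩
              · rw [hcanon', hcan]
                simp only [pvUpd]
                rw [if_neg (by rw [← m5]; exact hlt)]
                rfl
              · have hupd : pvUpd (some b) ((pvComp grid bg h w fuel x).length : Int)
                    (pvCell grid x.1 x.2) = some b := by
                  simp only [pvUpd]
                  rw [if_neg (by rw [← m5]; exact hlt)]
                rw [hcanon', hcan, hupd, hb2, hcan]
      · -- background cell: both sides skip
        have hfgx : ¬ pvFg grid bg h w x := fun hf => hcell hf.2.2.2.2
        have hskipA : pvCellStepA grid bg h w fuel st x.1 x.2 = st := by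
          simp only [pvCellStepA]
          rw [if_neg]
          rintro ⟨hc, -⟩
          exact hcell hc
        have hskipC : pvCanon grid bg h w fuel (L ++ [x]) = pvCanon grid bg h w fuel L := by
          rw [hcanon]
          simp only [pvCanonStep]
          rw [if_neg]
          rintro ⟨hf, -⟩
          exact hfgx hf
        rw [hskipA]
        refine ⟨hnd, hfg, hcl, ?_, by rw [hskipC]; exact hb1, by rw [hskipC]; exact hb2⟩
        intro q
        rw [hmem q]
        constructor
        · rintro ⟨p, hp, hfp, hr⟩
          exact ⟨p, List.mem_append_left _ hp, hfp, hr⟩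
        · rintro ⟨p, hp, hfp, hr⟩
          rcases List.mem_append.1 hp with hp | hp
          · exact ⟨p, hp, hfp, hr⟩
          · have : p = x := List.mem_singleton.1 hp
            exact absurd hfp (this ▸ hfgx)
    have hsplit' : pvCells h w = (L ++ [x]) ++ cs := by rw [hsplit]; simp
    have hres := ih (L ++ [x]) hsplit' _ hstep
    simpa [List.foldl_cons] using hres

-- ---------- B: union-find machinery ----------
abbrev pvPar (parent : PySem.Dict (Int × Int) (Int × Int)) (p : Int × Int) : Int × Int :=
  PySem.Dict.getD parent p p

-- one strict parent-pointer step
abbrev pvStepR (parent : PySem.Dict (Int × Int) (Int × Int)) (a b : Int × Int) : Prop :=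
  pvPar parent a = b ∧ b ≠ a

def pvChain (parent : PySem.Dict (Int × Int) (Int × Int)) : Int × Int → Int × Int → Prop :=
  Relation.ReflTransGen (pvStepR parent)

def pvEnc (w : Int) (p : Int × Int) : Nat := p.1.toNat * w.toNat + p.2.toNat

lemma pvEnc_lt (w : Int) {p q : Int × Int}
    (hq1 : 0 ≤ q.1) (hq2 : 0 ≤ q.2) (hq3 : q.2 < w)
    (hp1 : 0 ≤ p.1) (hp2 : 0 ≤ p.2) (hlt : pvLt q p) :
    pvEnc w q < pvEnc w p := by
  rcases hlt with hlt | ⟨he, hlt⟩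
  · have h1 := Nat.mul_le_mul_right w.toNat (show q.1.toNat + 1 ≤ p.1.toNat by omega)
    rw [Nat.add_mul, Nat.one_mul] at h1
    have h2 : q.2.toNat < w.toNat := by omega
    unfold pvEnc
    omega
  · unfold pvEnc
    rw [he]
    omega

lemma pvEnc_lt_of_fg (grid : List (List Int)) (bg h w : Int) {p : Int × Int}
    (hp : pvFg grid bg h w p) : pvEnc w p < h.toNat * w.toNat := by
  obtain ⟨h1, h2, h3, h4, -⟩ := hp
  have hw : 0 < w.toNat := by omega
  have h5 := Nat.mul_le_mul_right w.toNat (show p.1.toNat + 1 ≤ h.toNat by omega)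
  rw [Nat.add_mul, Nat.one_mul] at h5
  unfold pvEnc
  omega

lemma pvPar_insert (parent : PySem.Dict (Int × Int) (Int × Int)) (k v p : Int × Int) :
    pvPar (parent.insert k v) p = if p = k then v else pvPar parent p := by
  unfold pvPar
  rw [PySem.Dict.getD_insert]

-- chains are unique up to their root
lemma pvChain_unique (parent : PySem.Dict (Int × Int) (Int × Int)) :
    ∀ {p r1 : Int × Int}, pvChain parent p r1 → pvPar parent r1 = r1 →
    ∀ {r2 : Int × Int}, pvChain parent p r2 → pvPar parent r2 = r2 → r1 = r2 := by
  intro p r1 h1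
  induction h1 using Relation.ReflTransGen.head_induction_on with
  | refl =>
    intro hr1 r2 h2 hr2
    rcases (Relation.ReflTransGen.cases_head h2) with rfl | ⟨c, hc, -⟩
    · rfl
    · exact absurd hr1 (by rw [hc.1]; exact (hc.2).symm ∘ Eq.symm)
  | head hstep htail ih =>
    intro hr1 r2 h2 hr2
    rcases (Relation.ReflTransGen.cases_head h2) with rfl | ⟨c, hc, hrest⟩
    · exact absurd hr2 (by rw [hstep.1]; exact fun he => hstep.2 he)
    · have : c = _ := hc.1.symm.trans hstep.1
      subst this
      exact ih hr1 hrest hr2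

lemma pvUfFind_spec (grid : List (List Int)) (bg h w : Int)
    (parent : PySem.Dict (Int × Int) (Int × Int))
    (hKfg : ∀ p ∈ parent.keys, pvFg grid bg h w p)
    (hD : ∀ p ∈ parent.keys, pvPar parent p ∈ parent.keys
        ∧ (pvPar parent p = p ∨ pvLt (pvPar parent p) p)) :
    ∀ (fuel : Nat) (p : Int × Int), pvEnc w p < fuel → p ∈ parent.keys →
      pvChain parent p (pvUfFind parent fuel p)
      ∧ pvPar parent (pvUfFind parent fuel p) = pvUfFind parent fuel p
      ∧ pvUfFind parent fuel p ∈ parent.keys := by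
  intro fuel
  induction fuel with
  | zero => intro p hfp hp; omega
  | succ fuel ih =>
    intro p hfp hp
    by_cases hq : PySem.Dict.getD parent p p = p
    · have hfix : pvUfFind parent (fuel + 1) p = p := by
        simp [pvUfFind, hq]
      rw [hfix]
      exact ⟨Relation.ReflTransGen.refl, hq, hp⟩
    · have hred : pvUfFind parent (fuel + 1) p = pvUfFind parent fuel (pvPar parent p) := by
        simp [pvUfFind, hq]
      obtain ⟨hmem, hor⟩ := hD p hp
      have hlt : pvLt (pvPar parent p) p := hor.resolve_left hq
      have hfgp := hKfg p hp
      have hfgq := hKfg _ hmem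
      have henc : pvEnc w (pvPar parent p) < pvEnc w p :=
        pvEnc_lt w hfgq.1 hfgq.2.2.1 hfgq.2.2.2.1 hfgp.1 hfgp.2.2.1 hlt
      obtain ⟨c1, c2, c3⟩ := ih (pvPar parent p) (by omega) hmem
      rw [hred]
      exact ⟨Relation.ReflTransGen.head ⟨rfl, hq⟩ c1, c2, c3⟩

lemma pvUfFind_eq_of_chain (grid : List (List Int)) (bg h w : Int)
    (parent : PySem.Dict (Int × Int) (Int × Int))
    (hKfg : ∀ p ∈ parent.keys, pvFg grid bg h w p)
    (hD : ∀ p ∈ parent.keys, pvPar parent p ∈ parent.keys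
        ∧ (pvPar parent p = p ∨ pvLt (pvPar parent p) p))
    {fuel : Nat} {p r : Int × Int} (hfuel : pvEnc w p < fuel) (hp : p ∈ parent.keys)
    (hchain : pvChain parent p r) (hroot : pvPar parent r = r) :
    pvUfFind parent fuel p = r := by
  obtain ⟨hc, hr, -⟩ := pvUfFind_spec grid bg h w parent hKfg hD fuel p hfuel hp
  exact pvChain_unique parent hc hr hchain hroot

-- a chain of the old dict survives inserting at a root
lemma pvChain_insert_of_root {parent : PySem.Dict (Int × Int) (Int × Int)}
    {k : Int × Int} (v : Int × Int) (hk : pvPar parent k = k)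
    {p r : Int × Int} (h : pvChain parent p r) : pvChain (parent.insert k v) p r := by
  induction h with
  | refl => exact Relation.ReflTransGen.refl
  | tail hc hstep ih =>
    rename_i b c
    have hbk : b ≠ k := by
      rintro rfl
      exact hstep.2 (hstep.1.symm.trans hk)
    refine Relation.ReflTransGen.tail ih ⟨?_, hstep.2⟩
    rw [pvPar_insert, if_neg hbk]
    exact hstep.1

-- ---------- B: restricted connectivity and the union-find invariant ----------
abbrev pvEL (grid : List (List Int)) (bg h w : Int) (L : List (Int × Int))
    (p q : Int × Int) : Prop :=
  pvE grid bg h w p q ∧ p ∈ L ∧ q ∈ L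

def pvReachL (grid : List (List Int)) (bg h w : Int) (L : List (Int × Int)) :
    Int × Int → Int × Int → Prop :=
  Relation.ReflTransGen (pvEL grid bg h w L)

lemma pvReachL_symm (grid : List (List Int)) (bg h w : Int) (L : List (Int × Int)) :
    Symmetric (pvReachL grid bg h w L) :=
  Relation.ReflTransGen.symmetric (fun _ _ hpq =>
    ⟨pvE_symm grid bg h w hpq.1, hpq.2.2, hpq.2.1⟩)

lemma pvReachL_mono (grid : List (List Int)) (bg h w : Int) {L L' : List (Int × Int)}
    (hsub : ∀ p ∈ L, p ∈ L') {p q : Int × Int}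
    (hr : pvReachL grid bg h w L p q) : pvReachL grid bg h w L' p q :=
  Relation.ReflTransGen.mono (fun _ _ he => ⟨he.1, hsub _ he.2.1, hsub _ he.2.2⟩) hr

lemma pvReachL_from_notmem (grid : List (List Int)) (bg h w : Int)
    {L : List (Int × Int)} {x q : Int × Int} (hx : x ∉ L)
    (h : pvReachL grid bg h w L x q) : q = x := by
  rcases Relation.ReflTransGen.cases_head h with rfl | ⟨c, hc, -⟩
  · rfl
  · exact absurd hc.2.1 hx

lemma pvReachL_cells (grid : List (List Int)) (bg h w : Int) {p q : Int × Int} :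
    pvReachL grid bg h w (pvCells h w) p q ↔ pvReach grid bg h w p q := by
  constructor
  · exact Relation.ReflTransGen.mono (fun _ _ he => he.1)
  · refine Relation.ReflTransGen.mono (fun a b he => ⟨he, ?_, ?_⟩)
    · exact (pvCells_mem h w a).2 ⟨he.1.1, he.1.2.1, he.1.2.2.1, he.1.2.2.2.1⟩
    · exact (pvCells_mem h w b).2 ⟨he.2.1.1, he.2.1.2.1, he.2.1.2.2.1, he.2.1.2.2.2.1⟩

-- z is connected (within L + the new cell x) to the new cell x
abbrev pvCX (grid : List (List Int)) (bg h w : Int) (L : List (Int × Int))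
    (x z : Int × Int) : Prop :=
  z = x ∨ ∃ a, pvE grid bg h w x a ∧ a ∈ L ∧ pvReachL grid bg h w L a z

lemma pvReachL_snoc_iff (grid : List (List Int)) (bg h w : Int)
    {L : List (Int × Int)} {x : Int × Int} (hx : x ∉ L) (p q : Int × Int) :
    pvReachL grid bg h w (L ++ [x]) p q
    ↔ pvReachL grid bg h w L p q
      ∨ (pvCX grid bg h w L x p ∧ pvCX grid bg h w L x q) := by
  constructor
  · intro hr
    induction hr using Relation.ReflTransGen.head_induction_on with
    | refl => exact Or.inl Relation.ReflTransGen.refl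
    | head hstep htail ih =>
      rename_i a c
      obtain ⟨he, haL', hcL'⟩ := hstep
      rcases List.mem_append.1 haL' with haL | hax
      · rcases List.mem_append.1 hcL' with hcL | hcx
        · -- an old edge a–c
          rcases ih with ih | ⟨ihc, ihq⟩
          · exact Or.inl (Relation.ReflTransGen.head ⟨he, haL, hcL⟩ ih)
          · refine Or.inr ⟨?_, ihq⟩
            rcases ihc with rfl | ⟨b0, hE, hbL, hb⟩
            · exact absurd hcL hx
            · exact Or.inr ⟨b0, hE, hbL,
                Relation.ReflTransGen.tail hb ⟨pvE_symm grid bg h w he, hcL, haL⟩⟩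
        · -- c = x, a ∈ L
          have hcx : c = x := List.mem_singleton.1 hcx
          have he' : pvE grid bg h w a x := hcx ▸ he
          have hCXa : pvCX grid bg h w L x a :=
            Or.inr ⟨a, pvE_symm grid bg h w he', haL, Relation.ReflTransGen.refl⟩
          rcases ih with ih | ⟨-, ihq⟩
          · have hq' : q = x := pvReachL_from_notmem grid bg h w hx (hcx ▸ ih)
            exact Or.inr ⟨hCXa, Or.inl hq'⟩
          · exact Or.inr ⟨hCXa, ihq⟩
      · -- a = x
        have hax : a = x := List.mem_singleton.1 hax
        have he' : pvE grid bg h w x c := hax ▸ he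
        have hcL : c ∈ L := by
          rcases List.mem_append.1 hcL' with hcL | hcx2
          · exact hcL
          · exact absurd (List.mem_singleton.1 hcx2)
              (fun hh => pvNbrs_ne_self (hh ▸ he'.2.2) rfl)
        refine Or.inr ⟨Or.inl hax, ?_⟩
        rcases ih with ih | ⟨-, ihq⟩
        · exact Or.inr ⟨c, he', hcL, ih⟩
        · exact ihq
  · intro hr
    rcases hr with hr | ⟨hp, hq⟩
    · exact pvReachL_mono grid bg h w (fun z hz => List.mem_append_left _ hz) hr
    · have key : ∀ z, pvCX grid bg h w L x z →
          pvReachL grid bg h w (L ++ [x]) x z := by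
        intro z hz
        rcases hz with rfl | ⟨a, hE, haL, hra⟩
        · exact Relation.ReflTransGen.refl
        · refine Relation.ReflTransGen.head
            ⟨hE, List.mem_append_right _ (by simp), List.mem_append_left _ haL⟩ ?_
          exact pvReachL_mono grid bg h w (fun z hz => List.mem_append_left _ hz) hra
      exact (pvReachL_symm grid bg h w (L ++ [x]) (key p hp)).trans (key q hq)

def pvInvUF (grid : List (List Int)) (bg h w : Int) (fuel : Nat)
    (L : List (Int × Int)) (parent : PySem.Dict (Int × Int) (Int × Int)) : Prop :=
  parent.keys.Nodup
  ∧ (∀ p, p ∈ parent.keys ↔ (pvFg grid bg h w p ∧ p ∈ L))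
  ∧ (∀ p ∈ parent.keys, pvPar parent p ∈ parent.keys
      ∧ (pvPar parent p = p ∨ pvLt (pvPar parent p) p))
  ∧ (∀ p ∈ parent.keys, pvReachL grid bg h w L p (pvUfFind parent fuel p))
  ∧ (∀ p ∈ parent.keys, ∀ q, pvReachL grid bg h w L p q
      → ¬ pvLt q (pvUfFind parent fuel p))

lemma pvRootEq_iff (grid : List (List Int)) (bg h w : Int) (fuel : Nat)
    (L : List (Int × Int)) (parent : PySem.Dict (Int × Int) (Int × Int))
    (hinv : pvInvUF grid bg h w fuel L parent) {p q : Int × Int}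
    (hp : p ∈ parent.keys) (hq : q ∈ parent.keys) :
    pvUfFind parent fuel p = pvUfFind parent fuel q ↔ pvReachL grid bg h w L p q := by
  obtain ⟨-, -, -, hR1, hM⟩ := hinv
  constructor
  · intro he
    exact ((hR1 p hp).trans (he ▸ (pvReachL_symm grid bg h w L (hR1 q hq))))
  · intro hr
    have h1 : ¬ pvLt (pvUfFind parent fuel q) (pvUfFind parent fuel p) :=
      hM p hp _ (hr.trans (hR1 q hq))
    have h2 : ¬ pvLt (pvUfFind parent fuel p) (pvUfFind parent fuel q) :=
      hM q hq _ ((pvReachL_symm grid bg h w L hr).trans (hR1 p hp))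
    rcases pvLt_trichotomy (pvUfFind parent fuel p) (pvUfFind parent fuel q) with h | h | h
    · exact absurd h h2
    · exact h
    · exact absurd h h1


-- inserting a fresh singleton x ↦ x
lemma pvInsertFresh_spec (grid : List (List Int)) (bg h w : Int)
    (parent : PySem.Dict (Int × Int) (Int × Int)) (x : Int × Int)
    (hnd : parent.keys.Nodup)
    (hKfg : ∀ p ∈ parent.keys, pvFg grid bg h w p)
    (hD : ∀ p ∈ parent.keys, pvPar parent p ∈ parent.keys
        ∧ (pvPar parent p = p ∨ pvLt (pvPar parent p) p))
    (hxfg : pvFg grid bg h w x) (hx : x ∉ parent.keys) :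
    (∀ p, p ∈ (parent.insert x x).keys ↔ p = x ∨ p ∈ parent.keys)
    ∧ (parent.insert x x).keys.Nodup
    ∧ (∀ p ∈ (parent.insert x x).keys, pvFg grid bg h w p)
    ∧ (∀ p ∈ (parent.insert x x).keys, pvPar (parent.insert x x) p ∈ (parent.insert x x).keys
        ∧ (pvPar (parent.insert x x) p = p ∨ pvLt (pvPar (parent.insert x x) p) p))
    ∧ (∀ fuel : Nat, ∀ p ∈ parent.keys, pvEnc w p < fuel →
        pvUfFind (parent.insert x x) fuel p = pvUfFind parent fuel p)
    ∧ (∀ fuel : Nat, pvEnc w x < fuel → pvUfFind (parent.insert x x) fuel x = x) := by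
  have hmemk : ∀ p, p ∈ (parent.insert x x).keys ↔ p = x ∨ p ∈ parent.keys :=
    fun p => PySem.Dict.mem_keys_insert parent x p x
  have hkfg1 : ∀ p ∈ (parent.insert x x).keys, pvFg grid bg h w p := by
    intro p hp
    rcases (hmemk p).1 hp with rfl | hp
    · exact hxfg
    · exact hKfg p hp
  have hparx : pvPar (parent.insert x x) x = x := by
    rw [pvPar_insert, if_pos rfl]
  have hD1 : ∀ p ∈ (parent.insert x x).keys, pvPar (parent.insert x x) p ∈ (parent.insert x x).keys
      ∧ (pvPar (parent.insert x x) p = p ∨ pvLt (pvPar (parent.insert x x) p) p) := by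
    intro p hp
    rcases (hmemk p).1 hp with rfl | hp
    · refine ⟨?_, Or.inl hparx⟩
      rw [hparx]
      exact hp
    · have hne : p ≠ x := fun he => hx (he ▸ hp)
      rw [pvPar_insert, if_neg hne]
      exact ⟨(hmemk _).2 (Or.inr (hD p hp).1), (hD p hp).2⟩
  refine ⟨hmemk, PySem.Dict.nodup_keys_insert parent x x hnd, hkfg1, hD1, ?_, ?_⟩
  · intro fuel p hp hfp
    have hrootx : pvPar parent x = x := by
      have hc : parent.contains x = false := by
        rcases hcc : parent.contains x with _ | _
        · rfl
        · exact absurd ((PySem.Dict.contains_iff_mem_keys parent x).1 hcc) hx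
      exact PySem.Dict.getD_of_not_contains parent x hc
    obtain ⟨hch, hrt, hrm⟩ := pvUfFind_spec grid bg h w parent hKfg hD fuel p hfp hp
    refine pvUfFind_eq_of_chain grid bg h w (parent.insert x x) hkfg1 hD1 hfp
      ((hmemk p).2 (Or.inr hp)) (pvChain_insert_of_root x hrootx hch) ?_
    have hrne : pvUfFind parent fuel p ≠ x := fun he => hx (he ▸ hrm)
    rw [pvPar_insert, if_neg hrne]
    exact hrt
  · intro fuel hfx
    exact pvUfFind_eq_of_chain grid bg h w (parent.insert x x) hkfg1 hD1 hfx
      ((hmemk x).2 (Or.inl rfl)) Relation.ReflTransGen.refl hparx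

lemma pvUfUnion_eq_of_find_eq (parent : PySem.Dict (Int × Int) (Int × Int)) (fuel : Nat)
    (p q : Int × Int) (heq : pvUfFind parent fuel p = pvUfFind parent fuel q) :
    pvUfUnion parent fuel p q = parent := by
  unfold pvUfUnion
  rw [if_pos heq]

-- the semantic effect of Source B's union on roots
lemma pvUnion_spec (grid : List (List Int)) (bg h w : Int)
    (parent : PySem.Dict (Int × Int) (Int × Int)) (fuel : Nat)
    (hnd : parent.keys.Nodup)
    (hKfg : ∀ p ∈ parent.keys, pvFg grid bg h w p)
    (hD : ∀ p ∈ parent.keys, pvPar parent p ∈ parent.keys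
        ∧ (pvPar parent p = p ∨ pvLt (pvPar parent p) p))
    (hfuelK : ∀ p ∈ parent.keys, pvEnc w p < fuel)
    (a b : Int × Int) (ha : a ∈ parent.keys) (hb : b ∈ parent.keys)
    (hne : pvUfFind parent fuel a ≠ pvUfFind parent fuel b) :
    (∀ p, p ∈ (pvUfUnion parent fuel a b).keys ↔ p ∈ parent.keys)
    ∧ (pvUfUnion parent fuel a b).keys.Nodup
    ∧ (∀ p ∈ (pvUfUnion parent fuel a b).keys, pvFg grid bg h w p)
    ∧ (∀ p ∈ (pvUfUnion parent fuel a b).keys,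
        pvPar (pvUfUnion parent fuel a b) p ∈ (pvUfUnion parent fuel a b).keys
        ∧ (pvPar (pvUfUnion parent fuel a b) p = p
           ∨ pvLt (pvPar (pvUfUnion parent fuel a b) p) p))
    ∧ (∀ p ∈ parent.keys, pvUfFind (pvUfUnion parent fuel a b) fuel p
        = if pvUfFind parent fuel p
            = (if pvLt (pvUfFind parent fuel b) (pvUfFind parent fuel a)
               then pvUfFind parent fuel a else pvUfFind parent fuel b)
          then (if pvLt (pvUfFind parent fuel b) (pvUfFind parent fuel a)
                then pvUfFind parent fuel b else pvUfFind parent fuel a)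
          else pvUfFind parent fuel p) := by
  obtain ⟨hcha, hrta, hrma⟩ := pvUfFind_spec grid bg h w parent hKfg hD fuel a (hfuelK a ha) ha
  obtain ⟨hchb, hrtb, hrmb⟩ := pvUfFind_spec grid bg h w parent hKfg hD fuel b (hfuelK b hb) hb
  set ra := pvUfFind parent fuel a with hra
  set rb := pvUfFind parent fuel b with hrb
  set mn := if pvLt rb ra then rb else ra with hmn
  set mx := if pvLt rb ra then ra else rb with hmx
  have hmnmem : mn ∈ parent.keys := by rw [hmn]; split <;> assumption
  have hmxmem : mx ∈ parent.keys := by rw [hmx]; split <;> assumption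
  have hmnrt : pvPar parent mn = mn := by rw [hmn]; split <;> assumption
  have hmxrt : pvPar parent mx = mx := by rw [hmx]; split <;> assumption
  have hnem : mn ≠ mx := by
    rw [hmn, hmx]; split
    · exact fun he => hne he.symm
    · exact hne
  have hltnm : pvLt mn mx := by
    rw [hmn, hmx]
    split
    · assumption
    · rcases pvLt_trichotomy ra rb with h1 | h1 | h1
      · exact h1
      · exact absurd h1 hne
      · exact absurd h1 (by assumption)
  have hU : pvUfUnion parent fuel a b = parent.insert mx mn := by
    unfold pvUfUnion
    rw [if_neg hne]
    by_cases hba : pvLt rb ra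
    · rw [if_pos (by rw [pvLexLt_eq]; exact hba)]
      rw [hmx, hmn, if_pos hba, if_pos hba]
    · rw [if_neg (by rw [pvLexLt_eq]; exact hba)]
      rw [hmx, hmn, if_neg hba, if_neg hba]
  rw [hU]
  have hmemk : ∀ p, p ∈ (parent.insert mx mn).keys ↔ p ∈ parent.keys := by
    intro p
    rw [PySem.Dict.mem_keys_insert]
    constructor
    · rintro (rfl | hp)
      · exact hmxmem
      · exact hp
    · exact Or.inr
  have hkfg1 : ∀ p ∈ (parent.insert mx mn).keys, pvFg grid bg h w p :=
    fun p hp => hKfg p ((hmemk p).1 hp)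
  have hD1 : ∀ p ∈ (parent.insert mx mn).keys,
      pvPar (parent.insert mx mn) p ∈ (parent.insert mx mn).keys
      ∧ (pvPar (parent.insert mx mn) p = p ∨ pvLt (pvPar (parent.insert mx mn) p) p) := by
    intro p hp
    by_cases hpx : p = mx
    · subst hpx
      rw [pvPar_insert, if_pos rfl]
      exact ⟨(hmemk mn).2 hmnmem, Or.inr hltnm⟩
    · rw [pvPar_insert, if_neg hpx]
      have hp' := (hmemk p).1 hp
      exact ⟨(hmemk _).2 (hD p hp').1, (hD p hp').2⟩
  refine ⟨hmemk, PySem.Dict.nodup_keys_insert parent mx mn hnd, hkfg1, hD1, ?_⟩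
  intro p hp
  obtain ⟨hchp, hrtp, hrmp⟩ := pvUfFind_spec grid bg h w parent hKfg hD fuel p (hfuelK p hp) hp
  by_cases hpm : pvUfFind parent fuel p = mx
  · rw [if_pos hpm]
    refine pvUfFind_eq_of_chain grid bg h w (parent.insert mx mn) hkfg1 hD1
      (hfuelK p hp) ((hmemk p).2 hp) ?_ ?_
    · refine Relation.ReflTransGen.tail (pvChain_insert_of_root mn hmxrt (hpm ▸ hchp)) ?_
      exact ⟨by rw [pvPar_insert, if_pos rfl], hnem⟩
    · rw [pvPar_insert, if_neg hnem]
      exact hmnrt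
  · rw [if_neg hpm]
    refine pvUfFind_eq_of_chain grid bg h w (parent.insert mx mn) hkfg1 hD1
      (hfuelK p hp) ((hmemk p).2 hp) (pvChain_insert_of_root mn hmxrt hchp) ?_
    rw [pvPar_insert, if_neg hpm]
    exact hrtp

-- the only L-neighbours of the new cell x are its up and left cells
lemma pvNbrX (grid : List (List Int)) (bg h w : Int) {L : List (Int × Int)}
    {x a : Int × Int} (hLlt : ∀ p ∈ L, pvLt p x)
    (hE : pvE grid bg h w x a) (haL : a ∈ L) :
    a = (x.1 - 1, x.2) ∨ a = (x.1, x.2 - 1) := by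
  have hn := hE.2.2
  have hlt := hLlt a haL
  rcases x with ⟨r, c⟩
  simp only [pvNbrsOf, pvDeltas, List.map_cons, List.map_nil, List.mem_cons,
    List.not_mem_nil, or_false] at hn
  rcases hn with rfl | rfl | rfl | rfl
  · left; simp; omega
  · exfalso; simp [pvLt] at hlt
  · right; simp; omega
  · exfalso; simp [pvLt] at hlt

lemma pvGuardU_iff (grid : List (List Int)) (bg h w : Int) {L : List (Int × Int)}
    {x : Int × Int} (hfgx : pvFg grid bg h w x)
    (hcomp : ∀ q : Int × Int, (0 ≤ q.1 ∧ q.1 < h ∧ 0 ≤ q.2 ∧ q.2 < w) → pvLt q x → q ∈ L) :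
    (0 < x.1 ∧ pvCell grid (x.1 - 1) x.2 ≠ bg)
    ↔ (pvE grid bg h w x (x.1 - 1, x.2) ∧ (x.1 - 1, x.2) ∈ L) := by
  obtain ⟨h1, h2, h3, h4, h5⟩ := hfgx
  constructor
  · rintro ⟨hg1, hg2⟩
    have hfgu : pvFg grid bg h w (x.1 - 1, x.2) := ⟨by omega, by omega, h3, h4, hg2⟩
    refine ⟨⟨⟨h1, h2, h3, h4, h5⟩, hfgu, ?_⟩, hcomp _ ⟨by omega, by omega, h3, h4⟩ (Or.inl (by omega))⟩
    simp [pvNbrsOf, pvDeltas, sub_eq_add_neg]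
  · rintro ⟨⟨-, hfgu, -⟩, -⟩
    exact ⟨by have := hfgu.1; omega, hfgu.2.2.2.2⟩

lemma pvGuardL_iff (grid : List (List Int)) (bg h w : Int) {L : List (Int × Int)}
    {x : Int × Int} (hfgx : pvFg grid bg h w x)
    (hcomp : ∀ q : Int × Int, (0 ≤ q.1 ∧ q.1 < h ∧ 0 ≤ q.2 ∧ q.2 < w) → pvLt q x → q ∈ L) :
    (0 < x.2 ∧ pvCell grid x.1 (x.2 - 1) ≠ bg)
    ↔ (pvE grid bg h w x (x.1, x.2 - 1) ∧ (x.1, x.2 - 1) ∈ L) := by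
  obtain ⟨h1, h2, h3, h4, h5⟩ := hfgx
  constructor
  · rintro ⟨hg1, hg2⟩
    have hfgu : pvFg grid bg h w (x.1, x.2 - 1) := ⟨h1, h2, by omega, by omega, hg2⟩
    refine ⟨⟨⟨h1, h2, h3, h4, h5⟩, hfgu, ?_⟩, hcomp _ ⟨h1, h2, by omega, by omega⟩ (Or.inr ⟨rfl, by omega⟩)⟩
    simp [pvNbrsOf, pvDeltas, sub_eq_add_neg]
  · rintro ⟨⟨-, hfgu, -⟩, -⟩
    exact ⟨by have := hfgu.2.2.1; omega, hfgu.2.2.2.2⟩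

-- establishing the invariant for L ++ [x] from a description of the final roots
lemma pvInvUF_glue (grid : List (List Int)) (bg h w : Int) (fuel : Nat)
    (L : List (Int × Int)) (x : Int × Int) (hxL : x ∉ L)
    (parent parentF : PySem.Dict (Int × Int) (Int × Int))
    (hinv : pvInvUF grid bg h w fuel L parent)
    (hfgx : pvFg grid bg h w x)
    (hkeysF : ∀ p, p ∈ parentF.keys ↔ p = x ∨ p ∈ parent.keys)
    (hndF : parentF.keys.Nodup)
    (hDF : ∀ p ∈ parentF.keys, pvPar parentF p ∈ parentF.keys
        ∧ (pvPar parentF p = p ∨ pvLt (pvPar parentF p) p))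
    (N : List (Int × Int))
    (hNE : ∀ a ∈ N, pvE grid bg h w x a ∧ a ∈ L)
    (hNall : ∀ a, pvE grid bg h w x a → a ∈ L → ∃ b ∈ N, pvReachL grid bg h w L b a)
    (mn : Int × Int)
    (hmn1 : mn = x ∨ ∃ a ∈ N, pvReachL grid bg h w L a mn)
    (hmn2 : ¬ pvLt x mn)
    (hmn3 : ∀ a ∈ N, ∀ q, pvReachL grid bg h w L a q → ¬ pvLt q mn)
    (hrx : pvUfFind parentF fuel x = mn)
    (hrold1 : ∀ p ∈ parent.keys, (∃ a ∈ N, pvReachL grid bg h w L a p) →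
        pvUfFind parentF fuel p = mn)
    (hrold2 : ∀ p ∈ parent.keys, ¬ (∃ a ∈ N, pvReachL grid bg h w L a p) →
        pvUfFind parentF fuel p = pvUfFind parent fuel p) :
    pvInvUF grid bg h w fuel (L ++ [x]) parentF := by
  obtain ⟨hnd0, hK0, hD0, hR0, hM0⟩ := hinv
  have hCX : ∀ z, pvCX grid bg h w L x z ↔ (z = x ∨ ∃ b ∈ N, pvReachL grid bg h w L b z) := by
    intro z
    constructor
    · rintro (rfl | ⟨a, hE, haL, hr⟩)
      · exact Or.inl rfl
      · obtain ⟨b, hbN, hba⟩ := hNall a hE haL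
        exact Or.inr ⟨b, hbN, hba.trans hr⟩
    · rintro (rfl | ⟨b, hbN, hbz⟩)
      · exact Or.inl rfl
      · exact Or.inr ⟨b, (hNE b hbN).1, (hNE b hbN).2, hbz⟩
  have hxmn : pvReachL grid bg h w (L ++ [x]) x mn := by
    rcases hmn1 with rfl | ⟨a, haN, hamn⟩
    · exact Relation.ReflTransGen.refl
    · exact Relation.ReflTransGen.head
        ⟨(hNE a haN).1, List.mem_append_right _ (by simp),
          List.mem_append_left _ (hNE a haN).2⟩
        (pvReachL_mono grid bg h w (fun z hz => List.mem_append_left _ hz) hamn)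
  refine ⟨hndF, ?_, hDF, ?_, ?_⟩
  · intro p
    rw [hkeysF p]
    constructor
    · rintro (rfl | hp)
      · exact ⟨hfgx, List.mem_append_right _ (by simp)⟩
      · exact ⟨((hK0 p).1 hp).1, List.mem_append_left _ ((hK0 p).1 hp).2⟩
    · rintro ⟨hf, hp⟩
      rcases List.mem_append.1 hp with hp | hp
      · exact Or.inr ((hK0 p).2 ⟨hf, hp⟩)
      · exact Or.inl (List.mem_singleton.1 hp)
  · intro p hp
    rcases (hkeysF p).1 hp with rfl | hp'
    · rw [hrx]; exact hxmn
    · by_cases hm : ∃ a ∈ N, pvReachL grid bg h w L a p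
      · rw [hrold1 p hp' hm]
        obtain ⟨a, haN, hap⟩ := hm
        refine Relation.ReflTransGen.trans ?_ hxmn
        refine Relation.ReflTransGen.tail ?_
          ⟨pvE_symm grid bg h w (hNE a haN).1, List.mem_append_left _ (hNE a haN).2,
            List.mem_append_right _ (by simp)⟩
        exact pvReachL_symm grid bg h w _
          (pvReachL_mono grid bg h w (fun z hz => List.mem_append_left _ hz) hap)
      · rw [hrold2 p hp' hm]
        exact pvReachL_mono grid bg h w (fun z hz => List.mem_append_left _ hz) (hR0 p hp')
  · intro p hp q hq
    rw [pvReachL_snoc_iff grid bg h w hxL] at hq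
    rcases (hkeysF p).1 hp with rfl | hp'
    · rw [hrx]
      rcases hq with hq | ⟨-, hqCX⟩
      · rw [pvReachL_from_notmem grid bg h w hxL hq]
        exact hmn2
      · rcases (hCX q).1 hqCX with rfl | ⟨b, hbN, hbq⟩
        · exact hmn2
        · exact hmn3 b hbN q hbq
    · by_cases hm : ∃ a ∈ N, pvReachL grid bg h w L a p
      · rw [hrold1 p hp' hm]
        rcases hq with hq | ⟨-, hqCX⟩
        · obtain ⟨a, haN, hap⟩ := hm
          exact hmn3 a haN q (hap.trans hq)
        · rcases (hCX q).1 hqCX with rfl | ⟨b, hbN, hbq⟩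
          · exact hmn2
          · exact hmn3 b hbN q hbq
      · rw [hrold2 p hp' hm]
        rcases hq with hq | ⟨hpCX, -⟩
        · exact hM0 p hp' q hq
        · rcases (hCX p).1 hpCX with rfl | ⟨b, hbN, hbp⟩
          · exact absurd ((hK0 p).1 hp').2 hxL
          · exact absurd ⟨b, hbN, hbp⟩ hm

-- one build-pass cell preserves the union-find invariant
lemma pvBuildStep_inv (grid : List (List Int)) (bg h w : Int) (fuel : Nat)
    (hfuelB : ∀ p : Int × Int, pvFg grid bg h w p → pvEnc w p < fuel)
    (L : List (Int × Int)) (x : Int × Int)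
    (hx : 0 ≤ x.1 ∧ x.1 < h ∧ 0 ≤ x.2 ∧ x.2 < w)
    (hxL : x ∉ L) (hLlt : ∀ p ∈ L, pvLt p x)
    (hcomp : ∀ q : Int × Int, (0 ≤ q.1 ∧ q.1 < h ∧ 0 ≤ q.2 ∧ q.2 < w) → pvLt q x → q ∈ L)
    (parent : PySem.Dict (Int × Int) (Int × Int))
    (hinv : pvInvUF grid bg h w fuel L parent) :
    pvInvUF grid bg h w fuel (L ++ [x]) (pvBuildStep grid bg fuel parent x.1 x.2) := by
  obtain ⟨r, c⟩ := x
  obtain ⟨hnd0, hK0, hD0, hR0, hM0⟩ := hinv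
  have hinv' : pvInvUF grid bg h w fuel L parent := ⟨hnd0, hK0, hD0, hR0, hM0⟩
  have hKfg0 : ∀ p ∈ parent.keys, pvFg grid bg h w p := fun p hp => ((hK0 p).1 hp).1
  have hfuelK0 : ∀ p ∈ parent.keys, pvEnc w p < fuel := fun p hp => hfuelB p (hKfg0 p hp)
  by_cases hcell : pvCell grid r c ≠ bg
  case neg =>
    have hBS : pvBuildStep grid bg fuel parent r c = parent := by
      simp only [pvBuildStep]
      rw [if_neg hcell]
    rw [hBS]
    have hnf : ¬ pvFg grid bg h w (r, c) := fun hf => hcell hf.2.2.2.2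
    refine ⟨hnd0, ?_, hD0, ?_, ?_⟩
    · intro p
      rw [hK0 p]
      constructor
      · rintro ⟨hf, hp⟩
        exact ⟨hf, List.mem_append_left _ hp⟩
      · rintro ⟨hf, hp⟩
        rcases List.mem_append.1 hp with hp | hp
        · exact ⟨hf, hp⟩
        · exact absurd hf ((List.mem_singleton.1 hp) ▸ hnf)
    · intro p hp
      exact pvReachL_mono grid bg h w (fun z hz => List.mem_append_left _ hz) (hR0 p hp)
    · intro p hp q hq
      rw [pvReachL_snoc_iff grid bg h w hxL] at hq
      rcases hq with hq | ⟨hpCX, -⟩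
      · exact hM0 p hp q hq
      · rcases hpCX with hpx | ⟨a, hE, -, -⟩
        · exact absurd (hpx ▸ hKfg0 p hp) hnf
        · exact absurd hE.1 hnf
  case pos =>
    have hfgx : pvFg grid bg h w (r, c) := ⟨hx.1, hx.2.1, hx.2.2.1, hx.2.2.2, hcell⟩
    have hxK : (r, c) ∉ parent.keys := fun hh => hxL ((hK0 _).1 hh).2
    obtain ⟨k1mem, k1nd, k1fg, k1D, k1oldF, k1xF⟩ :=
      pvInsertFresh_spec grid bg h w parent (r, c) hnd0 hKfg0 hD0 hfgx hxK
    have hfuelx : pvEnc w (r, c) < fuel := hfuelB _ hfgx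
    have k1old : ∀ p ∈ parent.keys,
        pvUfFind (parent.insert (r, c) (r, c)) fuel p = pvUfFind parent fuel p :=
      fun p hp => k1oldF fuel p hp (hfuelK0 p hp)
    have k1x : pvUfFind (parent.insert (r, c) (r, c)) fuel (r, c) = (r, c) :=
      k1xF fuel hfuelx
    have hfuelK1 : ∀ p ∈ (parent.insert (r, c) (r, c)).keys, pvEnc w p < fuel :=
      fun p hp => hfuelB p (k1fg p hp)
    have hfpK : ∀ p ∈ parent.keys, pvUfFind parent fuel p ∈ parent.keys :=
      fun p hp => (pvUfFind_spec grid bg h w parent hKfg0 hD0 fuel p (hfuelK0 p hp) hp).2.2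
    have hfpx : ∀ p ∈ parent.keys, pvUfFind parent fuel p ≠ (r, c) :=
      fun p hp he => hxK (he ▸ hfpK p hp)
    have hfpL : ∀ p ∈ parent.keys, pvUfFind parent fuel p ∈ L :=
      fun p hp => ((hK0 _).1 (hfpK p hp)).2
    have hre : ∀ p ∈ parent.keys, ∀ q ∈ parent.keys,
        (pvUfFind parent fuel p = pvUfFind parent fuel q ↔ pvReachL grid bg h w L p q) :=
      fun p hp q hq => pvRootEq_iff grid bg h w fuel L parent hinv' hp hq
    by_cases hgU : 0 < r ∧ pvCell grid (r - 1) c ≠ bg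
    · -- up neighbour united
      obtain ⟨hEu, huL⟩ := (pvGuardU_iff grid bg h w hfgx hcomp).1 hgU
      have huK : (r - 1, c) ∈ parent.keys := (hK0 _).2 ⟨hEu.2.1, huL⟩
      have hruK : pvUfFind parent fuel (r - 1, c) ∈ parent.keys := hfpK _ huK
      have hruL : pvUfFind parent fuel (r - 1, c) ∈ L := hfpL _ huK
      have hxru : ¬ pvLt (r, c) (pvUfFind parent fuel (r - 1, c)) :=
        pvLt_asymm (hLlt _ hruL)
      have huK1 : (r - 1, c) ∈ (parent.insert (r, c) (r, c)).keys :=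
        (k1mem _).2 (Or.inr huK)
      have hxK1 : (r, c) ∈ (parent.insert (r, c) (r, c)).keys := (k1mem _).2 (Or.inl rfl)
      have hne1 : pvUfFind (parent.insert (r, c) (r, c)) fuel (r - 1, c)
          ≠ pvUfFind (parent.insert (r, c) (r, c)) fuel (r, c) := by
        rw [k1old _ huK, k1x]
        exact hfpx _ huK
      obtain ⟨u2mem, u2nd, u2fg, u2D, u2map⟩ :=
        pvUnion_spec grid bg h w (parent.insert (r, c) (r, c)) fuel k1nd k1fg k1D hfuelK1
          (r - 1, c) (r, c) huK1 hxK1 hne1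
      rw [k1old _ huK, k1x, if_neg hxru, if_neg hxru] at u2map
      -- now: ∀ p ∈ P1.keys, find2 p = if find1 p = (r,c) then find parent (r-1,c) else find1 p
      have hf2old : ∀ p ∈ parent.keys,
          pvUfFind (pvUfUnion (parent.insert (r, c) (r, c)) fuel (r - 1, c) (r, c)) fuel p
          = pvUfFind parent fuel p := by
        intro p hp
        have h2 := u2map p ((k1mem p).2 (Or.inr hp))
        rw [k1old p hp, if_neg (hfpx p hp)] at h2
        exact h2
      have hf2x : pvUfFind (pvUfUnion (parent.insert (r, c) (r, c)) fuel (r - 1, c) (r, c)) fuel (r, c)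
          = pvUfFind parent fuel (r - 1, c) := by
        have h2 := u2map (r, c) hxK1
        rw [k1x, if_pos rfl] at h2
        exact h2
      have hkeysF2 : ∀ p, p ∈ (pvUfUnion (parent.insert (r, c) (r, c)) fuel (r - 1, c) (r, c)).keys
          ↔ p = (r, c) ∨ p ∈ parent.keys := fun p => (u2mem p).trans (k1mem p)
      by_cases hgL : 0 < c ∧ pvCell grid r (c - 1) ≠ bg
      · -- both neighbours
        obtain ⟨hEl, hlL⟩ := (pvGuardL_iff grid bg h w hfgx hcomp).1 hgL
        have hlK : (r, c - 1) ∈ parent.keys := (hK0 _).2 ⟨hEl.2.1, hlL⟩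
        have hrlK : pvUfFind parent fuel (r, c - 1) ∈ parent.keys := hfpK _ hlK
        have hrlL : pvUfFind parent fuel (r, c - 1) ∈ L := hfpL _ hlK
        have hxrl : ¬ pvLt (r, c) (pvUfFind parent fuel (r, c - 1)) :=
          pvLt_asymm (hLlt _ hrlL)
        have hlK2 : (r, c - 1) ∈ (pvUfUnion (parent.insert (r, c) (r, c)) fuel (r - 1, c) (r, c)).keys :=
          (hkeysF2 _).2 (Or.inr hlK)
        have hxK2 : (r, c) ∈ (pvUfUnion (parent.insert (r, c) (r, c)) fuel (r - 1, c) (r, c)).keys :=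
          (hkeysF2 _).2 (Or.inl rfl)
        have hfuelK2 : ∀ p ∈ (pvUfUnion (parent.insert (r, c) (r, c)) fuel (r - 1, c) (r, c)).keys,
            pvEnc w p < fuel := fun p hp => hfuelB p (u2fg p hp)
        have hBS : pvBuildStep grid bg fuel parent r c
            = pvUfUnion (pvUfUnion (parent.insert (r, c) (r, c)) fuel (r - 1, c) (r, c))
                fuel (r, c - 1) (r, c) := by
          simp only [pvBuildStep]
          rw [if_pos hcell]
          simp only [if_pos hgU, if_pos hgL]
        rw [hBS]
        by_cases heq : pvUfFind parent fuel (r, c - 1) = pvUfFind parent fuel (r - 1, c)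
        · -- classes already merged by the up-union
          have hU3 : pvUfUnion (pvUfUnion (parent.insert (r, c) (r, c)) fuel (r - 1, c) (r, c))
              fuel (r, c - 1) (r, c)
              = pvUfUnion (parent.insert (r, c) (r, c)) fuel (r - 1, c) (r, c) :=
            pvUfUnion_eq_of_find_eq _ _ _ _ (by rw [hf2old _ hlK, hf2x]; exact heq)
          rw [hU3]
          refine pvInvUF_glue grid bg h w fuel L (r, c) hxL parent _ hinv' hfgx hkeysF2 u2nd u2D
            [(r - 1, c), (r, c - 1)] ?_ ?_ (pvUfFind parent fuel (r - 1, c)) ?_ hxru ?_ hf2x ?_ ?_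
          · intro a ha
            rcases List.mem_cons.1 ha with rfl | ha
            · exact ⟨hEu, huL⟩
            · rw [List.mem_singleton.1 ha]
              exact ⟨hEl, hlL⟩
          · intro a hE haL
            rcases pvNbrX grid bg h w hLlt hE haL with ha | ha
            · refine ⟨(r - 1, c), by simp, ?_⟩
              rw [ha]
              exact Relation.ReflTransGen.refl
            · refine ⟨(r, c - 1), by simp, ?_⟩
              rw [ha]
              exact Relation.ReflTransGen.refl
          · exact Or.inr ⟨(r - 1, c), by simp, hR0 _ huK⟩
          · intro a ha q hq
            rcases List.mem_cons.1 ha with rfl | ha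
            · exact hM0 _ huK q hq
            · rw [List.mem_singleton.1 ha] at hq
              exact heq ▸ hM0 _ hlK q hq
          · rintro p hp ⟨a, haN, hap⟩
            rw [hf2old p hp]
            rcases List.mem_cons.1 haN with rfl | haN
            · exact (hre p hp _ huK).2 (pvReachL_symm grid bg h w L hap)
            · rw [List.mem_singleton.1 haN] at hap
              rw [(hre p hp _ hlK).2 (pvReachL_symm grid bg h w L hap)]
              exact heq
          · intro p hp hm
            exact hf2old p hp
        · -- genuinely merging two old classes
          have hne2 : pvUfFind (pvUfUnion (parent.insert (r, c) (r, c)) fuel (r - 1, c) (r, c)) fuel (r, c - 1)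
              ≠ pvUfFind (pvUfUnion (parent.insert (r, c) (r, c)) fuel (r - 1, c) (r, c)) fuel (r, c) := by
            rw [hf2old _ hlK, hf2x]
            exact heq
          obtain ⟨u3mem, u3nd, u3fg, u3D, u3map⟩ :=
            pvUnion_spec grid bg h w (pvUfUnion (parent.insert (r, c) (r, c)) fuel (r - 1, c) (r, c))
              fuel u2nd u2fg u2D hfuelK2 (r, c - 1) (r, c) hlK2 hxK2 hne2
          rw [hf2old _ hlK, hf2x] at u3map
          have hkeysF3 : ∀ p, p ∈ (pvUfUnion (pvUfUnion (parent.insert (r, c) (r, c)) fuel (r - 1, c) (r, c))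
              fuel (r, c - 1) (r, c)).keys ↔ p = (r, c) ∨ p ∈ parent.keys :=
            fun p => (u3mem p).trans (hkeysF2 p)
          by_cases hrr : pvLt (pvUfFind parent fuel (r - 1, c)) (pvUfFind parent fuel (r, c - 1))
          · -- the up-root is the smaller one
            rw [if_pos hrr, if_pos hrr] at u3map
            refine pvInvUF_glue grid bg h w fuel L (r, c) hxL parent _ hinv' hfgx hkeysF3 u3nd u3D
              [(r - 1, c), (r, c - 1)] ?_ ?_ (pvUfFind parent fuel (r - 1, c)) ?_ hxru ?_ ?_ ?_ ?_
            · intro a ha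
              rcases List.mem_cons.1 ha with rfl | ha
              · exact ⟨hEu, huL⟩
              · rw [List.mem_singleton.1 ha]
                exact ⟨hEl, hlL⟩
            · intro a hE haL
              rcases pvNbrX grid bg h w hLlt hE haL with ha | ha
              · refine ⟨(r - 1, c), by simp, ?_⟩
                rw [ha]
                exact Relation.ReflTransGen.refl
              · refine ⟨(r, c - 1), by simp, ?_⟩
                rw [ha]
                exact Relation.ReflTransGen.refl
            · exact Or.inr ⟨(r - 1, c), by simp, hR0 _ huK⟩
            · intro a ha q hq
              rcases List.mem_cons.1 ha with rfl | ha
              · exact hM0 _ huK q hq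
              · rw [List.mem_singleton.1 ha] at hq
                exact pvLt_min_helper (hM0 _ hlK q hq) (Or.inr hrr)
            · have h3 := u3map (r, c) hxK2
              rw [hf2x, if_neg (fun he => pvLt_irrefl _ (he ▸ hrr))] at h3
              exact h3
            · rintro p hp ⟨a, haN, hap⟩
              have h3 := u3map p ((hkeysF2 p).2 (Or.inr hp))
              rw [hf2old p hp] at h3
              rcases List.mem_cons.1 haN with rfl | haN
              · have hfp : pvUfFind parent fuel p = pvUfFind parent fuel (r - 1, c) :=
                  (hre p hp _ huK).2 (pvReachL_symm grid bg h w L hap)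
                rw [if_neg (fun he => pvLt_irrefl _ ((hfp.symm.trans he) ▸ hrr))] at h3
                rw [h3, hfp]
              · rw [List.mem_singleton.1 haN] at hap
                have hfp : pvUfFind parent fuel p = pvUfFind parent fuel (r, c - 1) :=
                  (hre p hp _ hlK).2 (pvReachL_symm grid bg h w L hap)
                rw [if_pos hfp] at h3
                exact h3
            · intro p hp hm
              have h3 := u3map p ((hkeysF2 p).2 (Or.inr hp))
              rw [hf2old p hp] at h3
              rw [if_neg (fun he => hm ⟨(r, c - 1), by simp, pvReachL_symm grid bg h w L
                ((hre p hp _ hlK).1 he)⟩)] at h3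
              exact h3
          · -- the left-root is the smaller one
            have hlr : pvLt (pvUfFind parent fuel (r, c - 1)) (pvUfFind parent fuel (r - 1, c)) := by
              rcases pvLt_trichotomy (pvUfFind parent fuel (r, c - 1))
                (pvUfFind parent fuel (r - 1, c)) with h1 | h1 | h1
              · exact h1
              · exact absurd h1 heq
              · exact absurd h1 hrr
            rw [if_neg hrr, if_neg hrr] at u3map
            refine pvInvUF_glue grid bg h w fuel L (r, c) hxL parent _ hinv' hfgx hkeysF3 u3nd u3D
              [(r - 1, c), (r, c - 1)] ?_ ?_ (pvUfFind parent fuel (r, c - 1)) ?_ hxrl ?_ ?_ ?_ ?_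
            · intro a ha
              rcases List.mem_cons.1 ha with rfl | ha
              · exact ⟨hEu, huL⟩
              · rw [List.mem_singleton.1 ha]
                exact ⟨hEl, hlL⟩
            · intro a hE haL
              rcases pvNbrX grid bg h w hLlt hE haL with ha | ha
              · refine ⟨(r - 1, c), by simp, ?_⟩
                rw [ha]
                exact Relation.ReflTransGen.refl
              · refine ⟨(r, c - 1), by simp, ?_⟩
                rw [ha]
                exact Relation.ReflTransGen.refl
            · exact Or.inr ⟨(r, c - 1), by simp, hR0 _ hlK⟩
            · intro a ha q hq
              rcases List.mem_cons.1 ha with rfl | ha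
              · exact pvLt_min_helper (hM0 _ huK q hq) (Or.inr hlr)
              · rw [List.mem_singleton.1 ha] at hq
                exact hM0 _ hlK q hq
            · have h3 := u3map (r, c) hxK2
              rw [hf2x, if_pos rfl] at h3
              exact h3
            · rintro p hp ⟨a, haN, hap⟩
              have h3 := u3map p ((hkeysF2 p).2 (Or.inr hp))
              rw [hf2old p hp] at h3
              rcases List.mem_cons.1 haN with rfl | haN
              · have hfp : pvUfFind parent fuel p = pvUfFind parent fuel (r - 1, c) :=
                  (hre p hp _ huK).2 (pvReachL_symm grid bg h w L hap)
                rw [if_pos hfp] at h3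
                exact h3
              · rw [List.mem_singleton.1 haN] at hap
                have hfp : pvUfFind parent fuel p = pvUfFind parent fuel (r, c - 1) :=
                  (hre p hp _ hlK).2 (pvReachL_symm grid bg h w L hap)
                rw [if_neg (fun he => pvLt_irrefl _ ((hfp.symm.trans he) ▸ hlr))] at h3
                rw [h3, hfp]
            · intro p hp hm
              have h3 := u3map p ((hkeysF2 p).2 (Or.inr hp))
              rw [hf2old p hp] at h3
              rw [if_neg (fun he => hm ⟨(r - 1, c), by simp, pvReachL_symm grid bg h w L
                ((hre p hp _ huK).1 he)⟩)] at h3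
              exact h3
      · -- only the up neighbour
        have hBS : pvBuildStep grid bg fuel parent r c
            = pvUfUnion (parent.insert (r, c) (r, c)) fuel (r - 1, c) (r, c) := by
          simp only [pvBuildStep]
          rw [if_pos hcell]
          simp only [if_pos hgU, if_neg hgL]
        rw [hBS]
        refine pvInvUF_glue grid bg h w fuel L (r, c) hxL parent _ hinv' hfgx hkeysF2 u2nd u2D
          [(r - 1, c)] ?_ ?_ (pvUfFind parent fuel (r - 1, c)) ?_ hxru ?_ hf2x ?_ ?_
        · intro a ha
          rw [List.mem_singleton.1 ha]
          exact ⟨hEu, huL⟩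
        · intro a hE haL
          rcases pvNbrX grid bg h w hLlt hE haL with ha | ha
          · refine ⟨(r - 1, c), by simp, ?_⟩
            rw [ha]
            exact Relation.ReflTransGen.refl
          · exact absurd ((pvGuardL_iff grid bg h w hfgx hcomp).2 ⟨ha ▸ hE, ha ▸ haL⟩) hgL
        · exact Or.inr ⟨(r - 1, c), by simp, hR0 _ huK⟩
        · intro a ha q hq
          rw [List.mem_singleton.1 ha] at hq
          exact hM0 _ huK q hq
        · rintro p hp ⟨a, haN, hap⟩
          rw [List.mem_singleton.1 haN] at hap
          rw [hf2old p hp]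
          exact (hre p hp _ huK).2 (pvReachL_symm grid bg h w L hap)
        · intro p hp hm
          exact hf2old p hp
    · -- no up neighbour
      by_cases hgL : 0 < c ∧ pvCell grid r (c - 1) ≠ bg
      · -- only the left neighbour
        obtain ⟨hEl, hlL⟩ := (pvGuardL_iff grid bg h w hfgx hcomp).1 hgL
        have hlK : (r, c - 1) ∈ parent.keys := (hK0 _).2 ⟨hEl.2.1, hlL⟩
        have hrlL : pvUfFind parent fuel (r, c - 1) ∈ L := hfpL _ hlK
        have hxrl : ¬ pvLt (r, c) (pvUfFind parent fuel (r, c - 1)) :=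
          pvLt_asymm (hLlt _ hrlL)
        have hlK1 : (r, c - 1) ∈ (parent.insert (r, c) (r, c)).keys :=
          (k1mem _).2 (Or.inr hlK)
        have hxK1 : (r, c) ∈ (parent.insert (r, c) (r, c)).keys := (k1mem _).2 (Or.inl rfl)
        have hne1 : pvUfFind (parent.insert (r, c) (r, c)) fuel (r, c - 1)
            ≠ pvUfFind (parent.insert (r, c) (r, c)) fuel (r, c) := by
          rw [k1old _ hlK, k1x]
          exact hfpx _ hlK
        obtain ⟨u2mem, u2nd, u2fg, u2D, u2map⟩ :=
          pvUnion_spec grid bg h w (parent.insert (r, c) (r, c)) fuel k1nd k1fg k1D hfuelK1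
            (r, c - 1) (r, c) hlK1 hxK1 hne1
        rw [k1old _ hlK, k1x, if_neg hxrl, if_neg hxrl] at u2map
        have hf2old : ∀ p ∈ parent.keys,
            pvUfFind (pvUfUnion (parent.insert (r, c) (r, c)) fuel (r, c - 1) (r, c)) fuel p
            = pvUfFind parent fuel p := by
          intro p hp
          have h2 := u2map p ((k1mem p).2 (Or.inr hp))
          rw [k1old p hp, if_neg (hfpx p hp)] at h2
          exact h2
        have hf2x : pvUfFind (pvUfUnion (parent.insert (r, c) (r, c)) fuel (r, c - 1) (r, c)) fuel (r, c)
            = pvUfFind parent fuel (r, c - 1) := by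
          have h2 := u2map (r, c) hxK1
          rw [k1x, if_pos rfl] at h2
          exact h2
        have hkeysF2 : ∀ p, p ∈ (pvUfUnion (parent.insert (r, c) (r, c)) fuel (r, c - 1) (r, c)).keys
            ↔ p = (r, c) ∨ p ∈ parent.keys := fun p => (u2mem p).trans (k1mem p)
        have hBS : pvBuildStep grid bg fuel parent r c
            = pvUfUnion (parent.insert (r, c) (r, c)) fuel (r, c - 1) (r, c) := by
          simp only [pvBuildStep]
          rw [if_pos hcell]
          simp only [if_neg hgU, if_pos hgL]
        rw [hBS]
        refine pvInvUF_glue grid bg h w fuel L (r, c) hxL parent _ hinv' hfgx hkeysF2 u2nd u2D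
          [(r, c - 1)] ?_ ?_ (pvUfFind parent fuel (r, c - 1)) ?_ hxrl ?_ hf2x ?_ ?_
        · intro a ha
          rw [List.mem_singleton.1 ha]
          exact ⟨hEl, hlL⟩
        · intro a hE haL
          rcases pvNbrX grid bg h w hLlt hE haL with ha | ha
          · exact absurd ((pvGuardU_iff grid bg h w hfgx hcomp).2 ⟨ha ▸ hE, ha ▸ haL⟩) hgU
          · refine ⟨(r, c - 1), by simp, ?_⟩
            rw [ha]
            exact Relation.ReflTransGen.refl
        · exact Or.inr ⟨(r, c - 1), by simp, hR0 _ hlK⟩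
        · intro a ha q hq
          rw [List.mem_singleton.1 ha] at hq
          exact hM0 _ hlK q hq
        · rintro p hp ⟨a, haN, hap⟩
          rw [List.mem_singleton.1 haN] at hap
          rw [hf2old p hp]
          exact (hre p hp _ hlK).2 (pvReachL_symm grid bg h w L hap)
        · intro p hp hm
          exact hf2old p hp
      · -- isolated new cell
        have hBS : pvBuildStep grid bg fuel parent r c = parent.insert (r, c) (r, c) := by
          simp only [pvBuildStep]
          rw [if_pos hcell]
          simp only [if_neg hgU, if_neg hgL]
        rw [hBS]
        refine pvInvUF_glue grid bg h w fuel L (r, c) hxL parent _ hinv' hfgx k1mem k1nd k1D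
          [] (by simp) ?_ (r, c) (Or.inl rfl) (pvLt_irrefl _) (by simp) k1x ?_ ?_
        · intro a hE haL
          rcases pvNbrX grid bg h w hLlt hE haL with ha | ha
          · exact absurd ((pvGuardU_iff grid bg h w hfgx hcomp).2 ⟨ha ▸ hE, ha ▸ haL⟩) hgU
          · exact absurd ((pvGuardL_iff grid bg h w hfgx hcomp).2 ⟨ha ▸ hE, ha ▸ haL⟩) hgL
        · rintro p hp ⟨a, haN, -⟩
          exact absurd haN (List.not_mem_nil)
        · intro p hp hm
          exact k1old p hp

lemma pvBuild_all (grid : List (List Int)) (bg h w : Int) (fuel : Nat)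
    (hfuelB : ∀ p : Int × Int, pvFg grid bg h w p → pvEnc w p < fuel) :
    ∀ (cs L : List (Int × Int)), pvCells h w = L ++ cs →
    ∀ parent, pvInvUF grid bg h w fuel L parent →
    pvInvUF grid bg h w fuel (L ++ cs)
      (cs.foldl (fun par p => pvBuildStep grid bg fuel par p.1 p.2) parent) := by
  intro cs
  induction cs with
  | nil => intro L hsplit parent hinv; simpa using hinv
  | cons x cs ih =>
    intro L hsplit parent hinv
    obtain ⟨hxb, hxL, hLlt, hcomp⟩ := pvSplit_facts h w L x cs hsplit
    have hstep := pvBuildStep_inv grid bg h w fuel hfuelB L x hxb hxL hLlt hcomp parent hinv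
    have hsplit' : pvCells h w = (L ++ [x]) ++ cs := by
      rw [hsplit]; simp
    have := ih (L ++ [x]) hsplit' _ hstep
    simpa using this

-- ---------- B: the final pieces ----------
-- the size Counter gives each leader its component's size
lemma pvSizes_at_leader (grid : List (List Int)) (bg h w : Int)
    (fuel fuelA : Nat)
    (hfuelA : 2 * (h.toNat * w.toNat) + 1 ≤ fuelA)
    (parent : PySem.Dict (Int × Int) (Int × Int))
    (hinv : pvInvUF grid bg h w fuel (pvCells h w) parent)
    {x : Int × Int} (hx : pvFg grid bg h w x)
    (hroot : pvUfFind parent fuel x = x) :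
    (PySem.Dict.counter ((PySem.Dict.keys parent).map (pvUfFind parent fuel))).getD x 0
      = ((pvComp grid bg h w fuelA x).length : Int) := by
  have hxC : x ∈ pvCells h w := (pvCells_mem h w x).2 ⟨hx.1, hx.2.1, hx.2.2.1, hx.2.2.2.1⟩
  have hxK : x ∈ parent.keys := (hinv.2.1 x).2 ⟨hx, hxC⟩
  obtain ⟨hcm, hcnd⟩ := pvComp_spec grid bg h w fuelA hfuelA hx
  rw [PySem.Dict.getD_counter]
  have hcnt : ((PySem.Dict.keys parent).map (pvUfFind parent fuel)).count x
      = (PySem.Dict.keys parent).countP (fun p => pvUfFind parent fuel p == x) := by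
    show ((PySem.Dict.keys parent).map (pvUfFind parent fuel)).countP (· == x) = _
    rw [List.countP_map]
    rfl
  have hpt : ∀ p ∈ parent.keys,
      ((pvUfFind parent fuel p == x) = true ↔ (decide (p ∈ pvComp grid bg h w fuelA x)) = true) := by
    intro p hp
    rw [beq_iff_eq, decide_eq_true_iff, hcm p]
    constructor
    · intro he
      have he' : pvUfFind parent fuel p = pvUfFind parent fuel x := by rw [he, hroot]
      have hr := (pvRootEq_iff grid bg h w fuel _ parent hinv hp hxK).1 he'
      exact pvReach_symm grid bg h w ((pvReachL_cells grid bg h w).1 hr)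
    · intro hr
      have hrL := (pvReachL_cells grid bg h w).2 (pvReach_symm grid bg h w hr)
      rw [(pvRootEq_iff grid bg h w fuel _ parent hinv hp hxK).2 hrL, hroot]
  rw [hcnt, List.countP_congr hpt, List.countP_eq_length_filter]
  have hndf : ((PySem.Dict.keys parent).filter
      (fun p => decide (p ∈ pvComp grid bg h w fuelA x))).Nodup := hinv.1.filter _
  have hperm : ((PySem.Dict.keys parent).filter
      (fun p => decide (p ∈ pvComp grid bg h w fuelA x))).Perm (pvComp grid bg h w fuelA x) := by
    refine (List.perm_ext_iff_of_nodup hndf hcnd).2 ?_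
    intro q
    rw [List.mem_filter, decide_eq_true_iff]
    constructor
    · rintro ⟨-, hq⟩
      exact hq
    · intro hq
      refine ⟨?_, hq⟩
      have hr := (hcm q).1 hq
      have hfq : pvFg grid bg h w q := pvReach_fg grid bg h w hx hr
      exact (hinv.2.1 q).2 ⟨hfq, (pvCells_mem h w q).2 ⟨hfq.1, hfq.2.1, hfq.2.2.1, hfq.2.2.2.1⟩⟩
  rw [hperm.length_eq]

-- at a foreground cell, being one's own root is being the component leader
lemma pvRoot_self_iff (grid : List (List Int)) (bg h w : Int) (fuel fuelA : Nat)
    (hfuelA : 2 * (h.toNat * w.toNat) + 1 ≤ fuelA)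
    (parent : PySem.Dict (Int × Int) (Int × Int))
    (hinv : pvInvUF grid bg h w fuel (pvCells h w) parent)
    {x : Int × Int} (hx : pvFg grid bg h w x) :
    pvUfFind parent fuel x = x ↔ pvLeader grid bg h w fuelA x := by
  obtain ⟨hnd0, hK0, hD0, hR0, hM0⟩ := hinv
  have hxC : x ∈ pvCells h w := (pvCells_mem h w x).2 ⟨hx.1, hx.2.1, hx.2.2.1, hx.2.2.2.1⟩
  have hxK : x ∈ parent.keys := (hK0 x).2 ⟨hx, hxC⟩
  have hcm := (pvComp_spec grid bg h w fuelA hfuelA hx).1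
  constructor
  · intro hroot q hq hlt
    have hr : pvReach grid bg h w x q := (hcm q).1 hq
    have hrL : pvReachL grid bg h w (pvCells h w) x q := (pvReachL_cells grid bg h w).2 hr
    exact hM0 x hxK q hrL (by rw [hroot]; exact hlt)
  · intro hlead
    have h1 : pvReachL grid bg h w (pvCells h w) x (pvUfFind parent fuel x) := hR0 x hxK
    have h2 : ¬ pvLt (pvUfFind parent fuel x) x := by
      intro hlt
      exact hlead _ ((hcm _).2 ((pvReachL_cells grid bg h w).1 h1)) hlt
    have h3 : ¬ pvLt x (pvUfFind parent fuel x) := hM0 x hxK x Relation.ReflTransGen.refl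
    rcases pvLt_trichotomy (pvUfFind parent fuel x) x with hh | hh | hh
    · exact absurd hh h2
    · exact hh
    · exact absurd hh h3

lemma pvScanB_eq_canon (grid : List (List Int)) (bg h w : Int) (fuel fuelA : Nat)
    (hfuelA : 2 * (h.toNat * w.toNat) + 1 ≤ fuelA)
    (parent : PySem.Dict (Int × Int) (Int × Int))
    (hinv : pvInvUF grid bg h w fuel (pvCells h w) parent) :
    (pvCells h w).foldl
      (fun st p => pvScanStepB grid bg fuel parent
        (PySem.Dict.counter ((PySem.Dict.keys parent).map (pvUfFind parent fuel))) st p.1 p.2)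
      none
    = pvCanon grid bg h w fuelA (pvCells h w) := by
  rw [pvCanon]
  refine PySem.List.foldl_congr_mem _ _ _ _ ?_
  intro st p hp
  obtain ⟨pr, pc⟩ := p
  obtain ⟨hb1, hb2, hb3, hb4⟩ := (pvCells_mem h w (pr, pc)).1 hp
  by_cases hcell : pvCell grid pr pc ≠ bg
  · have hfgp : pvFg grid bg h w (pr, pc) := ⟨hb1, hb2, hb3, hb4, hcell⟩
    by_cases hroot : pvUfFind parent fuel (pr, pc) = (pr, pc)
    · have hlead := (pvRoot_self_iff grid bg h w fuel fuelA hfuelA parent hinv hfgp).1 hroot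
      show pvScanStepB grid bg fuel parent _ st pr pc = _
      simp only [pvScanStepB, pvCanonStep]
      rw [if_pos ⟨hcell, hroot⟩, if_pos ⟨hfgp, hlead⟩]
      rw [pvSizes_at_leader grid bg h w fuel fuelA hfuelA parent hinv hfgp hroot]
      cases st <;> rfl
    · have hnl : ¬ pvLeader grid bg h w fuelA (pr, pc) :=
        fun hl => hroot ((pvRoot_self_iff grid bg h w fuel fuelA hfuelA parent hinv hfgp).2 hl)
      show pvScanStepB grid bg fuel parent _ st pr pc = _
      simp only [pvScanStepB, pvCanonStep]
      rw [if_neg (fun hcon => hroot hcon.2), if_neg (fun hcon => hnl hcon.2)]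
  · show pvScanStepB grid bg fuel parent _ st pr pc = _
    simp only [pvScanStepB, pvCanonStep]
    rw [if_neg (fun hcon => hcell hcon.1), if_neg (fun hcon => hcell hcon.1.2.2.2.2)]

-- both ports compute the canonical fold (non-empty grid, bg abstracted)
lemma pvFinal (grid : List (List Int)) (bg : Int) :
    (((PySem.List.pyRange 0 (grid.length : Int) 1).foldl
      (fun st r => (PySem.List.pyRange 0 ((grid.headD []).length : Int) 1).foldl
        (fun st c => pvCellStepA grid bg (grid.length : Int) ((grid.headD []).length : Int)
          (2 * (grid.length * (grid.headD []).length) + 1) st r c) st)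
      (([], none, 0) : pvStateA)).2.2)
    = (match (PySem.List.pyRange 0 (grid.length : Int) 1).foldl
        (fun st r => (PySem.List.pyRange 0 ((grid.headD []).length : Int) 1).foldl
          (fun st c => pvScanStepB grid bg (grid.length * (grid.headD []).length + 1)
            ((PySem.List.pyRange 0 (grid.length : Int) 1).foldl
              (fun par r => (PySem.List.pyRange 0 ((grid.headD []).length : Int) 1).foldl
                (fun par c => pvBuildStep grid bg (grid.length * (grid.headD []).length + 1) par r c) par)
              PySem.Dict.empty)
            (PySem.Dict.counter ((PySem.Dict.keys
              ((PySem.List.pyRange 0 (grid.length : Int) 1).foldl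
                (fun par r => (PySem.List.pyRange 0 ((grid.headD []).length : Int) 1).foldl
                  (fun par c => pvBuildStep grid bg (grid.length * (grid.headD []).length + 1) par r c) par)
                PySem.Dict.empty)).map
              (pvUfFind ((PySem.List.pyRange 0 (grid.length : Int) 1).foldl
                (fun par r => (PySem.List.pyRange 0 ((grid.headD []).length : Int) 1).foldl
                  (fun par c => pvBuildStep grid bg (grid.length * (grid.headD []).length + 1) par r c) par)
                PySem.Dict.empty) (grid.length * (grid.headD []).length + 1))))
            st r c) st)
        none with
      | none => 0
      | some b => b.2) := by
  have hh : ((grid.length : Int)).toNat = grid.length := Int.toNat_natCast _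
  have hww : (((grid.headD []).length : Int)).toNat = (grid.headD []).length := Int.toNat_natCast _
  have hfA : 2 * (((grid.length : Int)).toNat * (((grid.headD []).length : Int)).toNat) + 1
      ≤ 2 * (grid.length * (grid.headD []).length) + 1 := by rw [hh, hww]
  have hfB : ∀ p : Int × Int,
      pvFg grid bg (grid.length : Int) ((grid.headD []).length : Int) p →
      pvEnc ((grid.headD []).length : Int) p < grid.length * (grid.headD []).length + 1 := by
    intro p hp
    have := pvEnc_lt_of_fg grid bg (grid.length : Int) ((grid.headD []).length : Int) hp
    rw [hh, hww] at this
    omega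
  have hInvA := pvScanA_go grid bg (grid.length : Int) ((grid.headD []).length : Int)
      (2 * (grid.length * (grid.headD []).length) + 1) hfA
      (pvCells (grid.length : Int) ((grid.headD []).length : Int)) [] (by simp)
      ([], none, 0) ⟨List.nodup_nil, by simp, by simp, by simp, rfl, rfl⟩
  rw [List.nil_append] at hInvA
  have hinit : pvInvUF grid bg (grid.length : Int) ((grid.headD []).length : Int)
      (grid.length * (grid.headD []).length + 1) [] PySem.Dict.empty := by
    refine ⟨?_, ?_, ?_, ?_, ?_⟩
    · rw [PySem.Dict.keys_empty]
      exact List.nodup_nil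
    · intro p
      rw [PySem.Dict.keys_empty]
      simp
    · intro p hp
      rw [PySem.Dict.keys_empty] at hp
      exact absurd hp (List.not_mem_nil)
    · intro p hp
      rw [PySem.Dict.keys_empty] at hp
      exact absurd hp (List.not_mem_nil)
    · intro p hp
      rw [PySem.Dict.keys_empty] at hp
      exact absurd hp (List.not_mem_nil)
  have hinvF := pvBuild_all grid bg (grid.length : Int) ((grid.headD []).length : Int)
      (grid.length * (grid.headD []).length + 1) hfB
      (pvCells (grid.length : Int) ((grid.headD []).length : Int)) [] (by simp)
      PySem.Dict.empty hinit
  rw [List.nil_append] at hinvF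
  rw [pvNestedFold, pvNestedFold, pvNestedFold]
  rw [hInvA.2.2.2.2.2]
  rw [pvScanB_eq_canon grid bg (grid.length : Int) ((grid.headD []).length : Int)
      (grid.length * (grid.headD []).length + 1)
      (2 * (grid.length * (grid.headD []).length) + 1) hfA _ hinvF]
  cases hc : pvCanon grid bg (grid.length : Int) ((grid.headD []).length : Int)
      (2 * (grid.length * (grid.headD []).length) + 1)
      (pvCells (grid.length : Int) ((grid.headD []).length : Int)) with
  | none => rfl
  | some b => rfl

-- ===== VERDICT (by name: the statement is the Claim_ definition above) =====
theorem smallest_object_color_spec : Claim_equal_smallest_object_color := by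
  intro grid _ _
  unfold Spec_smallest_object_color
  unfold smallest_object_color smallest_object_color_alt
  by_cases hempty : grid = [] ∨ grid.headD [] = []
  · rw [if_pos hempty, if_pos hempty]
  · rw [if_neg hempty, if_neg hempty]
    exact pvFinal grid _
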